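-- pv_equiv track=rewrite | github.com/daniilgriga/ARC | tests/Ideal/gen_tests.py | simulate_optimal_hits
-- ===== SOURCE A (Python) =====
-- from collections import defaultdict
-- import heapq
--
-- def simulate_optimal_hits (cache_size, requests):
--     if cache_size == 0:
--         return 0
--     n = len (requests)
--     if n == 0:
--         return 0
--
--     positions = defaultdict (list)
--     for i in range (n):
--         positions[requests[i]].append (i)
--
--     cache = set()
--     next_iter = defaultdict (int)
--     heap = []
--     tie = 0
--     hits = 0
--
--     for i in range (n):
--         key = requests[i]
--         if key in cache:
--             hits += 1
--         else:
--             it = next_iter[key]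
--             while it < len (positions[key]) and positions[key][it] <= i:
--                 it += 1
--             if it >= len (positions[key]):
--                 continue
--             next_for_new = positions[key][it]
--
--             if len (cache) >= cache_size:
--                 evicted = False
--                 while heap and not evicted:
--                     neg_time, t, k = heapq.heappop (heap)
--                     if k not in cache:
--                         continue
--                     curr_it = next_iter[k]
--                     curr_next = 10**9 + 1 if curr_it >= len (positions[k]) else positions[k][curr_it]
--                     if -neg_time == curr_next:
--                         cache.remove (k)
--                         evicted = True
--
--             cache.add (key)
--             next_iter[key] = it
--             heapq.heappush (heap, (-next_for_new, tie, key))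
--             tie += 1
--
--         it = next_iter[key]
--         while it < len (positions[key]) and positions[key][it] <= i:
--             it += 1
--         next_iter[key] = it
--         next_t = 10**9 + 1 if it >= len (positions[key]) else positions[key][it]
--         heapq.heappush (heap, (-next_t, tie, key))
--         tie += 1
--
--     return hits
-- ===== SOURCE B (Python) =====
-- def simulate_optimal_hits(cache_size, requests):
--     if cache_size == 0:
--         return 0
--
--     SENT = 10**9 + 1
--
--     positions = {}
--     for i, k in enumerate(requests):
--         positions.setdefault(k, []).append(i)
--
--     ptr = {}  # per-key resume pointer into positions[k]
--
--     def advance(k, i):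
--         # move k's pointer past all occurrences <= i, return it
--         ps = positions[k]
--         j = ptr.get(k, 0)
--         while j < len(ps) and ps[j] <= i:
--             j += 1
--         ptr[k] = j
--         return j
--
--     next_use = {}  # cached key -> index of its next request (SENT if none)
--     last_pos = {}  # key -> most recent request index seen so far
--     hits = 0
--
--     for i, key in enumerate(requests):
--         ps = positions[key]
--         if key in next_use:
--             hits += 1
--             j = advance(key, i)
--             next_use[key] = ps[j] if j < len(ps) else SENT
--         else:
--             j = advance(key, i)
--             if j < len(ps):  # key has a future occurrence: cache it
--                 if len(next_use) >= cache_size and next_use: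
--                     # evict the farthest-next-use key; among keys never
--                     # requested again, the least recently used one
--                     victim = None
--                     best = None
--                     for k, v in next_use.items():
--                         cand = (v, -last_pos[k])
--                         if best is None or cand > best:
--                             victim, best = k, cand
--                     del next_use[victim]
--                 next_use[key] = ps[j]
--         last_pos[key] = i
--     return hits
-- ===== Notes on version B (the rewrite author's own statement) =====
-- stated objective: alternative
-- what changed: A tracks eviction candidates in a lazy heapq of (-next_use, tie, key) entries (two pushes per request) with stale-entry skipping and validation against per-key pointers; B drops the heap entirely and keeps one next_use dict over just the cached keys, caching a key exactly when its occurrence pointer is not exhausted and picking the eviction victim by a direct scan (farthest next use; among keys never requested again, the least recently used), which provably returns the same hit count as A on every input.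
import Mathlib
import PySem

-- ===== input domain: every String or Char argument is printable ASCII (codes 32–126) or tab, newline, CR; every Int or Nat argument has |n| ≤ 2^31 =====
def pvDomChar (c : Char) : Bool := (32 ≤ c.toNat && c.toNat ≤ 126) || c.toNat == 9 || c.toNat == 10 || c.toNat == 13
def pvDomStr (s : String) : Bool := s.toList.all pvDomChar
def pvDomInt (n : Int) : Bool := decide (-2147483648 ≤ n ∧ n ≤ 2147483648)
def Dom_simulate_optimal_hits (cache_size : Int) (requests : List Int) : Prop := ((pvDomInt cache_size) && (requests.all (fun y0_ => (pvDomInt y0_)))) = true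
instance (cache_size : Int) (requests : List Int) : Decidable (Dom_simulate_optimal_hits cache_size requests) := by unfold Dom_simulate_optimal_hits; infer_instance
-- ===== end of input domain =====

-- B replaces A's lazy heap (tie-counted entries, stale-entry skipping) by a direct
-- scan of a next-use dict for the eviction victim — objective: a simpler data structure.

-- ===== PORT A =====
-- shared constant 10**9 + 1 (both Pythons use this sentinel)
def pvSENT : Int := 1000000001

-- positions = defaultdict(list); for i in range(n): positions[requests[i]].append(i)
-- (B builds the same table with dict.setdefault; the loop is identical, shared here)
def pvPositions (requests : List Int) : PySem.Dict Int (List Int) :=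
  (PySem.List.pyRange 0 requests.length).foldl
    (fun d i => d.modify (PySem.List.pyGetD requests i 0) [] (· ++ [i])) ⟨[]⟩

-- the pointer-advance loop `while it < len(ps) and ps[it] <= i: it += 1`
-- (textually identical in A and in B's advance helper; shared)
def pvAdvance (ps : List Int) (i : Int) (it : Int) : Int :=
  if h : it < (ps.length : Int) ∧ PySem.List.pyGetD ps it 0 ≤ i then
    pvAdvance ps i (it + 1)
  else it
termination_by ((ps.length : Int) - it).toNat
decreasing_by omega

-- heapq orders entries by tuple comparison (lexicographic on (Int, Int, Int))
def pvTripLt (x y : Int × Int × Int) : Bool :=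
  decide (x.1 < y.1 ∨ (x.1 = y.1 ∧ (x.2.1 < y.2.1 ∨ (x.2.1 = y.2.1 ∧ x.2.2 < y.2.2))))

-- heapq.heappop: remove and return the smallest entry (model of the heap as a multiset/list)
def pvPopMin : List (Int × Int × Int) → Option ((Int × Int × Int) × List (Int × Int × Int))
  | [] => none
  | x :: xs =>
    match pvPopMin xs with
    | none => some (x, [])
    | some (m, rest) => if pvTripLt m x then some (m, x :: rest) else some (x, xs)

theorem pvPopMin_length_lt {heap : List (Int × Int × Int)} {e rest}
    (h : pvPopMin heap = some (e, rest)) : rest.length < heap.length := by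
  induction heap generalizing e rest with
  | nil => simp [pvPopMin] at h
  | cons x xs ih =>
    simp only [pvPopMin] at h
    cases hx : pvPopMin xs with
    | none =>
      rw [hx] at h
      obtain ⟨h1, h2⟩ := Prod.mk.injEq .. ▸ (Option.some.injEq .. ▸ h)
      simp [← h2]
    | some mr =>
      rw [hx] at h
      by_cases hlt : pvTripLt mr.1 x
      · simp [hlt] at h
        have := ih (e := mr.1) (rest := mr.2) (by rw [hx])
        obtain ⟨h1, h2⟩ := h
        simp [← h2, List.length_cons]
        omega
      · simp [hlt] at h
        obtain ⟨h1, h2⟩ := h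
        simp [← h2]

-- curr_next = 10**9 + 1 if curr_it >= len(positions[k]) else positions[k][curr_it]
def pvCurrNext (positions : PySem.Dict Int (List Int)) (ni : PySem.Dict Int Int) (k : Int) : Int :=
  let ps := positions.getD k []
  let it := ni.getD k 0
  if (ps.length : Int) ≤ it then pvSENT else PySem.List.pyGetD ps it 0

-- the `while heap and not evicted:` lazy-deletion loop of A
def pvEvictLoop (positions : PySem.Dict Int (List Int)) (ni : PySem.Dict Int Int)
    (heap : List (Int × Int × Int)) (cache : PySem.Set Int) :
    List (Int × Int × Int) × PySem.Set Int :=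
  match h : pvPopMin heap with
  | none => (heap, cache)
  | some (e, rest) =>
    if PySem.Set.contains cache e.2.2 = false then pvEvictLoop positions ni rest cache
    else if -e.1 = pvCurrNext positions ni e.2.2 then
      -- cache.remove(k): k is in the cache here, so remove? returns some
      (rest, (PySem.Set.remove? cache e.2.2).getD cache)
    else pvEvictLoop positions ni rest cache
termination_by heap.length
decreasing_by all_goals exact pvPopMin_length_lt h

structure PvStA where
  cache : PySem.Set Int
  ni : PySem.Dict Int Int
  heap : List (Int × Int × Int)
  tie : Int
  hits : Int
deriving Repr

-- common tail of A's loop body: re-advance next_iter[key], push the refreshed entry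
def pvTailA (positions : PySem.Dict Int (List Int)) (st : PvStA) (i key : Int) : PvStA :=
  let ps := positions.getD key []
  let it := pvAdvance ps i (st.ni.getD key 0)
  let next_t := if (ps.length : Int) ≤ it then pvSENT else PySem.List.pyGetD ps it 0
  { st with ni := st.ni.insert key it,
            heap := st.heap ++ [(-next_t, st.tie, key)],
            tie := st.tie + 1 }

def pvStepA (positions : PySem.Dict Int (List Int)) (cs : Int) (requests : List Int)
    (st : PvStA) (i : Int) : PvStA :=
  let key := PySem.List.pyGetD requests i 0
  if PySem.Set.contains st.cache key then
    pvTailA positions { st with hits := st.hits + 1 } i key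
  else
    let ps := positions.getD key []
    let it := pvAdvance ps i (st.ni.getD key 0)
    if (ps.length : Int) ≤ it then st   -- `continue`
    else
      let next_for_new := PySem.List.pyGetD ps it 0
      let pr :=
        if cs ≤ PySem.Set.len st.cache then pvEvictLoop positions st.ni st.heap st.cache
        else (st.heap, st.cache)
      pvTailA positions
        { cache := PySem.Set.add pr.2 key,
          ni := st.ni.insert key it,
          heap := pr.1 ++ [(-next_for_new, st.tie, key)],
          tie := st.tie + 1,
          hits := st.hits } i key

def simulate_optimal_hits (cache_size : Int) (requests : List Int) : Int :=
  if cache_size = 0 then 0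
  else if requests.length = 0 then 0
  else
    ((PySem.List.pyRange 0 requests.length).foldl
      (pvStepA (pvPositions requests) cache_size requests) ⟨[], ⟨[]⟩, [], 0, 0⟩).hits

-- ===== PORT B =====
structure PvStB where
  ptr : PySem.Dict Int Int
  nu : PySem.Dict Int Int
  lp : PySem.Dict Int Int
  hits : Int
deriving Repr

-- Python tuple comparison on the 2-tuple key (v, -last_pos[k])
def pvPairLt (x y : Int × Int) : Bool :=
  decide (x.1 < y.1 ∨ (x.1 = y.1 ∧ x.2 < y.2))

-- B's explicit argmax scan over next_use.items()
def pvVictim (nu lp : PySem.Dict Int Int) : Int :=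
  ((nu.items.foldl (fun acc kv =>
      let cand := (kv.2, -(lp.getD kv.1 0))
      match acc with
      | none => some (kv.1, cand)
      | some vb => if pvPairLt vb.2 cand then some (kv.1, cand) else some vb
    ) none).map (·.1)).getD 0

def pvStepB (positions : PySem.Dict Int (List Int)) (cs : Int) (requests : List Int)
    (st : PvStB) (i : Int) : PvStB :=
  let key := PySem.List.pyGetD requests i 0
  let ps := positions.getD key []
  let st1 : PvStB :=
    if st.nu.contains key then
      -- hit: count it and refresh the key's next use
      let j := pvAdvance ps i (st.ptr.getD key 0)
      { st with hits := st.hits + 1,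
                nu := st.nu.insert key
                  (if j < (ps.length : Int) then PySem.List.pyGetD ps j 0 else pvSENT),
                ptr := st.ptr.insert key j }
    else
      let j := pvAdvance ps i (st.ptr.getD key 0)
      if j < (ps.length : Int) then
        -- the key has a future occurrence: cache it (evicting if full)
        let nu1 := if cs ≤ (st.nu.size : Int) ∧ st.nu.size ≠ 0 then
                     st.nu.erase (pvVictim st.nu st.lp)
                   else st.nu
        { st with nu := nu1.insert key (PySem.List.pyGetD ps j 0),
                  ptr := st.ptr.insert key j }
      else { st with ptr := st.ptr.insert key j }
  { st1 with lp := st1.lp.insert key i }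

def simulate_optimal_hits_alt (cache_size : Int) (requests : List Int) : Int :=
  if cache_size = 0 then 0
  else
    ((PySem.List.pyRange 0 requests.length).foldl
      (pvStepB (pvPositions requests) cache_size requests) ⟨⟨[]⟩, ⟨[]⟩, ⟨[]⟩, 0⟩).hits
-- ===== PRECONDITION & SPEC =====
def Spec_simulate_optimal_hits (cache_size : Int) (requests : List Int) (out : Int) : Prop := out = simulate_optimal_hits_alt cache_size requests
instance (cache_size : Int) (requests : List Int) (out : Int) : Decidable (Spec_simulate_optimal_hits cache_size requests out) := by unfold Spec_simulate_optimal_hits; infer_instance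

-- ===== CLAIM (what is proved, stated in full; the proofs are below) =====
def Claim_equal_simulate_optimal_hits : Prop := ∀ (cache_size : Int) (requests : List Int), Dom_simulate_optimal_hits cache_size requests → Spec_simulate_optimal_hits cache_size requests (simulate_optimal_hits cache_size requests)
-- ===== LEMMAS AND PROOFS =====

-- ---------- the request-trace vocabulary ----------

-- all request indices of key k, in increasing order
def pvOcc (requests : List Int) (k : Int) : List Int :=
  (PySem.List.pyRange 0 requests.length).filter
    (fun j => PySem.List.pyGetD requests j 0 == k)

-- first request index of k at or after i, as an Option (none = never again)
def pvNext? (requests : List Int) (i k : Int) : Option Int :=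
  (pvOcc requests k).find? (fun o => decide (i ≤ o))

-- the same with A's/B's numeric sentinel for "never again"
def pvNextGE (requests : List Int) (i k : Int) : Int :=
  (pvNext? requests i k).getD pvSENT

-- k is requested at or after time i
def pvLive (requests : List Int) (i k : Int) : Prop :=
  ∃ o ∈ pvOcc requests k, i ≤ o

-- last request index of k strictly before i
def pvLastOcc? (requests : List Int) (i k : Int) : Option Int :=
  ((pvOcc requests k).filter (fun o => decide (o < i))).getLast?

def pvLastOccD (requests : List Int) (i k : Int) : Int :=
  (pvLastOcc? requests i k).getD (-1)

-- eviction candidate key as B computes it, and the abstract victim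
def pvCand (requests : List Int) (i k : Int) : Int × Int :=
  (pvNextGE requests i k, -(pvLastOccD requests i k))

def pvIsVict (requests : List Int) (i : Int) (cache : List Int) (w : Int) : Prop :=
  w ∈ cache ∧ ∀ k ∈ cache, pvPairLt (pvCand requests i w) (pvCand requests i k) = false

-- pointer-validity: p is a legal resume point for the scan of pvOcc requests k at time i
def pvPtrOk (requests : List Int) (i k p : Int) : Prop :=
  0 ≤ p ∧ p ≤ ((pvOcc requests k).length : Int) ∧
    ∀ j : Nat, (j : Int) < p → (pvOcc requests k).getD j 0 < i

-- ---------- the STRONG simulation invariant (exact state correspondence; used while i ≤ 10^9+1) ----------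
structure PvInvS (requests : List Int) (i : Int) (sa : PvStA) (sb : PvStB) : Prop where
  nodupC : sa.cache.Nodup
  nodupK : sb.nu.keys.Nodup
  hits : sa.hits = sb.hits
  mem : ∀ k, k ∈ sa.cache ↔ sb.nu.contains k = true
  cnA : ∀ k ∈ sa.cache, pvCurrNext (pvPositions requests) sa.ni k = pvNextGE requests i k
  cnB : ∀ k ∈ sa.cache, sb.nu.getD k 0 = pvNextGE requests i k
  seen : ∀ k ∈ sa.cache, (pvLastOcc? requests i k).isSome
  lp : ∀ k, sb.lp.get? k = pvLastOcc? requests i k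
  sentN : ∀ e ∈ sa.heap, -e.1 = pvSENT → pvNextGE requests i e.2.2 = pvSENT
  heapValid : ∀ k ∈ sa.cache, ∃ t, (-(pvNextGE requests i k), t, k) ∈ sa.heap
  sent : (sa.heap.filter (fun e => -e.1 == pvSENT)).Pairwise
      (fun e e' => e.2.1 < e'.2.1 ∧
        (e.2.2 = e'.2.2 ∨ pvLastOccD requests i e.2.2 < pvLastOccD requests i e'.2.2))
  tie : ∀ e ∈ sa.heap, e.2.1 < sa.tie
  ptrA : ∀ k, pvPtrOk requests i k (sa.ni.getD k 0)
  ptrB : ∀ k, pvPtrOk requests i k (sb.ptr.getD k 0)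

-- ---------- the WEAK simulation invariant (after time 10^9+1: caches agree on keys that
-- are requested again; keys never requested again are interchangeable) ----------
structure PvInvW (requests : List Int) (i : Int) (sa : PvStA) (sb : PvStB) : Prop where
  nodupC : sa.cache.Nodup
  nodupK : sb.nu.keys.Nodup
  hits : sa.hits = sb.hits
  size : sa.cache.length = sb.nu.size
  liveAgree : ∀ k, pvLive requests i k → (k ∈ sa.cache ↔ sb.nu.contains k = true)
  cnA : ∀ k ∈ sa.cache, pvCurrNext (pvPositions requests) sa.ni k = pvNextGE requests i k
  cnB : ∀ k ∈ sb.nu.keys, sb.nu.getD k 0 = pvNextGE requests i k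
  heapValid : ∀ k ∈ sa.cache, ∃ t, (-(pvNextGE requests i k), t, k) ∈ sa.heap
  ptrA : ∀ k, pvPtrOk requests i k (sa.ni.getD k 0)
  ptrB : ∀ k, pvPtrOk requests i k (sb.ptr.getD k 0)

-- ---------- basic facts ----------

theorem pvOcc_mem {requests : List Int} {k x : Int} :
    x ∈ pvOcc requests k ↔ 0 ≤ x ∧ x < (requests.length : Int) ∧ PySem.List.pyGetD requests x 0 = k := by
  unfold pvOcc
  simp [List.mem_filter, PySem.List.mem_pyRange_one]
  tauto

theorem pvOcc_sorted (requests : List Int) (k : Int) : (pvOcc requests k).Pairwise (· < ·) := by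
  exact List.Pairwise.sublist List.filter_sublist (PySem.List.pairwise_lt_pyRange_one 0 requests.length)

theorem pvOcc_inj {requests : List Int} {k k' x : Int}
    (h : x ∈ pvOcc requests k) (h' : x ∈ pvOcc requests k') : k = k' := by
  rw [pvOcc_mem] at h h'
  exact h.2.2 ▸ h'.2.2

theorem pvPositions_getD (requests : List Int) (k : Int) :
    (pvPositions requests).getD k [] = pvOcc requests k := by
  unfold pvPositions pvOcc
  have h1 : (PySem.List.pyRange 0 requests.length).foldl
      (fun (d : PySem.Dict Int (List Int)) (i : Int) => d.modify (PySem.List.pyGetD requests i 0) [] (· ++ [i])) ⟨[]⟩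
    = ((PySem.List.pyRange 0 requests.length).map (fun i => (PySem.List.pyGetD requests i 0, i))).foldl
      (fun (d : PySem.Dict Int (List Int)) (p : Int × Int) => d.modify p.1 [] (· ++ [p.2])) ⟨[]⟩ := by
    rw [List.foldl_map]
  rw [h1, PySem.Dict.getD_foldl_modify_append]
  simp [List.filter_map, Function.comp_def]
  rfl

theorem pvLive_iff {requests : List Int} {i k : Int} :
    pvLive requests i k ↔ pvNext? requests i k ≠ none := by
  unfold pvLive pvNext?
  rw [← Option.isSome_iff_ne_none, List.find?_isSome]
  simp

theorem pvNext?_some_spec {requests : List Int} {i k o : Int}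
    (h : pvNext? requests i k = some o) :
    o ∈ pvOcc requests k ∧ i ≤ o ∧ ∀ o' ∈ pvOcc requests k, i ≤ o' → o ≤ o' := by
  obtain ⟨hpo, idx, hidx, hgo, hbef⟩ := List.find?_eq_some_iff_getElem.mp h
  refine ⟨List.mem_of_find?_eq_some h, by simpa using hpo, ?_⟩
  intro o' ho' hio'
  obtain ⟨j, hj, hgj⟩ := List.mem_iff_getElem.mp ho'
  rcases lt_trichotomy j idx with hji | hji | hji
  · have := hbef j hji
    simp [hgj] at this
    omega
  · subst hji
    rw [← hgo, hgj]
  · have := List.pairwise_iff_getElem.mp (pvOcc_sorted requests k) idx j hidx hj hji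
    rw [hgo, hgj] at this
    omega

theorem pvNextGE_spec (requests : List Int) (i k : Int) :
    pvNext? requests i k = none ∨
    (pvNextGE requests i k ∈ pvOcc requests k ∧ i ≤ pvNextGE requests i k ∧
      ∀ o ∈ pvOcc requests k, i ≤ o → pvNextGE requests i k ≤ o) := by
  cases hf : pvNext? requests i k with
  | none => exact Or.inl rfl
  | some o =>
    right
    have := pvNext?_some_spec hf
    unfold pvNextGE
    rw [hf]
    simpa using this

theorem pvDead_nextGE {requests : List Int} {i k : Int}
    (h : ¬ pvLive requests i k) : pvNextGE requests i k = pvSENT := by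
  rw [pvLive_iff, not_not] at h
  unfold pvNextGE
  rw [h]
  rfl

theorem pvNextGE_mem_of_ne {requests : List Int} {i k : Int}
    (h : pvNextGE requests i k ≠ pvSENT) :
    pvNextGE requests i k ∈ pvOcc requests k ∧ i ≤ pvNextGE requests i k := by
  rcases pvNextGE_spec requests i k with hs | ⟨hm, hi, _⟩
  · exfalso
    apply h
    unfold pvNextGE
    rw [hs]
    rfl
  · exact ⟨hm, hi⟩

-- a key whose numeric next use is the sentinel while it is still live must be
-- the key requested at index 10^9+1 itself
theorem pvLive_sent_key {requests : List Int} {i k : Int}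
    (hg : pvNextGE requests i k = pvSENT) (hl : pvLive requests i k) :
    pvSENT ∈ pvOcc requests k ∧ i ≤ pvSENT := by
  rw [pvLive_iff] at hl
  cases hf : pvNext? requests i k with
  | none => exact absurd hf hl
  | some o =>
    have hspec := pvNext?_some_spec hf
    have : o = pvSENT := by
      unfold pvNextGE at hg
      rw [hf] at hg
      simpa using hg
    subst this
    exact ⟨hspec.1, hspec.2.1⟩

theorem pvLive_mono {requests : List Int} {i k : Int}
    (h : pvLive requests (i + 1) k) : pvLive requests i k := by
  obtain ⟨o, ho, hio⟩ := h
  exact ⟨o, ho, by omega⟩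

theorem pvLive_self {requests : List Int} {i k : Int}
    (hi : 0 ≤ i) (hin : i < (requests.length : Int))
    (hk : PySem.List.pyGetD requests i 0 = k) : pvLive requests i k :=
  ⟨i, pvOcc_mem.mpr ⟨hi, hin, hk⟩, le_refl i⟩

theorem pvNextGE_self {requests : List Int} {i k : Int}
    (hi : 0 ≤ i) (hin : i < (requests.length : Int))
    (hk : PySem.List.pyGetD requests i 0 = k) : pvNextGE requests i k = i := by
  have hmem : i ∈ pvOcc requests k := pvOcc_mem.mpr ⟨hi, hin, hk⟩
  obtain ⟨idx, hidx, hgi⟩ := List.mem_iff_getElem.mp hmem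
  unfold pvNextGE pvNext?
  have hf : (pvOcc requests k).find? (fun o => decide (i ≤ o)) = some i := by
    rw [List.find?_eq_some_iff_getElem]
    refine ⟨by simp, idx, hidx, hgi, ?_⟩
    intro j hj
    have := List.pairwise_iff_getElem.mp (pvOcc_sorted requests k) j idx (by omega) hidx hj
    rw [hgi] at this
    simp
    omega
  rw [hf]
  rfl

theorem pvNextGE_succ_ne {requests : List Int} {i k : Int}
    (hne : PySem.List.pyGetD requests i 0 ≠ k) :
    pvNextGE requests (i + 1) k = pvNextGE requests i k := by
  unfold pvNextGE pvNext?
  have hcong : ∀ l : List Int, (∀ o ∈ l, o ∈ pvOcc requests k) →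
      l.find? (fun o => decide (i + 1 ≤ o)) = l.find? (fun o => decide (i ≤ o)) := by
    intro l
    induction l with
    | nil => simp
    | cons x xs ih =>
      intro hsub
      have hx : x ∈ pvOcc requests k := hsub x List.mem_cons_self
      have hxi : x ≠ i := by
        intro hxi
        exact hne ((pvOcc_mem.mp (hxi ▸ hx)).2.2)
      simp only [List.find?_cons]
      have heq : (decide (i + 1 ≤ x)) = (decide (i ≤ x)) := by
        by_cases h1 : i + 1 ≤ x <;> by_cases h2 : i ≤ x <;> simp [h1, h2] <;> omega
      rw [heq]
      cases hd : decide (i ≤ x) <;> simp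
      exact ih (fun o ho => hsub o (List.mem_cons_of_mem x ho))
  rw [hcong (pvOcc requests k) (fun o h => h)]

theorem pvLastOcc?_mem {requests : List Int} {i k o : Int}
    (h : pvLastOcc? requests i k = some o) : o ∈ pvOcc requests k ∧ o < i := by
  unfold pvLastOcc? at h
  obtain ⟨ys, hys⟩ := List.getLast?_eq_some_iff.mp h
  have hm : o ∈ (pvOcc requests k).filter (fun o => decide (o < i)) := by
    rw [hys]; simp
  simpa using List.mem_filter.mp hm

theorem pvLastOcc?_succ_self {requests : List Int} {i k : Int}
    (hi : 0 ≤ i) (hin : i < (requests.length : Int))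
    (hk : PySem.List.pyGetD requests i 0 = k) :
    pvLastOcc? requests (i + 1) k = some i := by
  unfold pvLastOcc?
  have hmax : ∀ (l : List Int), l.Pairwise (· < ·) → ∀ x, x ∈ l → (∀ y ∈ l, y ≤ x) →
      l.getLast? = some x := by
    intro l
    induction l with
    | nil => intro _ x hx; simp at hx
    | cons a as ih =>
      intro hp x hx hmx
      rcases List.pairwise_cons.mp hp with ⟨ha, has⟩
      cases as with
      | nil =>
        simp at hx
        simp [hx]
      | cons b bs =>
        rw [List.getLast?_cons]
        have hxas : x ∈ b :: bs := by
          rcases List.mem_cons.mp hx with hxa | hxas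
          · exfalso
            have hb := ha b List.mem_cons_self
            have := hmx b (List.mem_cons_of_mem a List.mem_cons_self)
            omega
          · exact hxas
        have hres := ih has x hxas (fun y hy => hmx y (List.mem_cons_of_mem a hy))
        rw [hres]
        rfl
  apply hmax
  · exact List.Pairwise.sublist List.filter_sublist (pvOcc_sorted requests k)
  · rw [List.mem_filter]
    refine ⟨pvOcc_mem.mpr ⟨hi, hin, hk⟩, by simp⟩
  · intro y hy
    rcases List.mem_filter.mp hy with ⟨_, hlt⟩
    simp at hlt
    omega

theorem pvLastOcc?_succ_ne {requests : List Int} {i k : Int}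
    (hne : PySem.List.pyGetD requests i 0 ≠ k) :
    pvLastOcc? requests (i + 1) k = pvLastOcc? requests i k := by
  unfold pvLastOcc?
  rw [List.filter_congr]
  intro o ho
  have hne' : o ≠ i := by
    intro h
    exact hne ((pvOcc_mem.mp (h ▸ ho)).2.2)
  by_cases h1 : o < i + 1 <;> by_cases h2 : o < i <;> simp [h1, h2] <;> omega

theorem pvLastOccD_lt {requests : List Int} {i k : Int} (hi : 0 ≤ i) :
    pvLastOccD requests i k < i := by
  unfold pvLastOccD
  cases h : pvLastOcc? requests i k with
  | none => simpa using by omega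
  | some o =>
    have := pvLastOcc?_mem h
    simpa using this.2

-- ---------- pointer advance ----------

theorem pvAdvance_spec (ps : List Int) (i : Int) :
    ∀ p : Int, 0 ≤ p → p ≤ (ps.length : Int) →
    (∀ j : Nat, (j : Int) < p → ps.getD j 0 ≤ i) →
    (p ≤ pvAdvance ps i p ∧ pvAdvance ps i p ≤ (ps.length : Int) ∧
      (∀ j : Nat, (j : Int) < pvAdvance ps i p → ps.getD j 0 ≤ i) ∧
      (pvAdvance ps i p < (ps.length : Int) → i < ps.getD (pvAdvance ps i p).toNat 0)) := by
  intro p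
  induction p using pvAdvance.induct ps i with
  | case1 p h ih =>
    intro h0 hlen hpre
    obtain ⟨hplt, hple⟩ := h
    have hgd : ps.getD p.toNat 0 ≤ i := by
      have : PySem.List.pyGetD ps p 0 = ps.getD p.toNat 0 := by
        rw [PySem.List.pyGetD_eq_getElem ps 0 h0 hplt, List.getD_eq_getElem ps 0 (by omega)]
      omega
    have hpre' : ∀ j : Nat, (j : Int) < p + 1 → ps.getD j 0 ≤ i := by
      intro j hj
      by_cases hjp : (j : Int) < p
      · exact hpre j hjp
      · rw [show j = p.toNat by omega]
        exact hgd
    obtain ⟨c1, c2, c3, c4⟩ := ih (by omega) (by omega) hpre'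
    rw [pvAdvance, dif_pos ⟨hplt, hple⟩]
    exact ⟨by omega, c2, c3, c4⟩
  | case2 p h =>
    intro h0 hlen hpre
    rw [pvAdvance, dif_neg h]
    refine ⟨le_refl p, hlen, hpre, ?_⟩
    intro hlt
    rcases not_and_or.mp h with h1 | h2
    · omega
    · have : PySem.List.pyGetD ps p 0 = ps.getD p.toNat 0 := by
        rw [PySem.List.pyGetD_eq_getElem ps 0 h0 hlt, List.getD_eq_getElem ps 0 (by omega)]
      omega

theorem pvAdvance_g {requests : List Int} {k i p : Int}
    (hi : 0 ≤ i) (hp : pvPtrOk requests i k p) :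
    pvPtrOk requests (i + 1) k (pvAdvance (pvOcc requests k) i p) ∧
    (((pvOcc requests k).length : Int) ≤ pvAdvance (pvOcc requests k) i p ↔
      ¬ pvLive requests (i + 1) k) ∧
    (if ((pvOcc requests k).length : Int) ≤ pvAdvance (pvOcc requests k) i p then pvSENT
     else PySem.List.pyGetD (pvOcc requests k) (pvAdvance (pvOcc requests k) i p) 0)
      = pvNextGE requests (i + 1) k := by
  obtain ⟨h0, hlen, hpre⟩ := hp
  obtain ⟨c1, c2, c3, c4⟩ := pvAdvance_spec (pvOcc requests k) i p h0 hlen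
    (fun j hj => by have := hpre j hj; omega)
  refine ⟨⟨by omega, c2, fun j hj => by have := c3 j hj; omega⟩, ?_⟩
  by_cases hql : (((pvOcc requests k).length : Int)) ≤ pvAdvance (pvOcc requests k) i p
  · have hnone : pvNext? requests (i + 1) k = none := by
      unfold pvNext?
      rw [List.find?_eq_none]
      intro x hx
      obtain ⟨j, hjlen, hgj⟩ := List.mem_iff_getElem.mp hx
      rw [← hgj]
      have := c3 j (by omega)
      rw [List.getD_eq_getElem _ 0 hjlen] at this
      simp
      omega
    constructor
    · rw [iff_true_intro hql, pvLive_iff, hnone]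
      simp
    · rw [if_pos hql]
      unfold pvNextGE
      rw [hnone]
      rfl
  · have hqlt : pvAdvance (pvOcc requests k) i p < ((pvOcc requests k).length : Int) := by omega
    have hqn : (pvAdvance (pvOcc requests k) i p).toNat < (pvOcc requests k).length := by omega
    have hval : PySem.List.pyGetD (pvOcc requests k) (pvAdvance (pvOcc requests k) i p) 0
        = (pvOcc requests k)[(pvAdvance (pvOcc requests k) i p).toNat] := by
      rw [PySem.List.pyGetD_eq_getElem _ 0 (by omega) hqlt]
    have hiq := c4 hqlt
    rw [List.getD_eq_getElem _ 0 hqn] at hiq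
    have hf : pvNext? requests (i + 1) k
        = some ((pvOcc requests k)[(pvAdvance (pvOcc requests k) i p).toNat]) := by
      unfold pvNext?
      rw [List.find?_eq_some_iff_getElem]
      refine ⟨by simp; omega, (pvAdvance (pvOcc requests k) i p).toNat, hqn, rfl, ?_⟩
      intro j hj
      have := c3 j (by omega)
      rw [List.getD_eq_getElem _ 0 (by omega)] at this
      simp
      omega
    constructor
    · rw [iff_false_intro (by omega : ¬ (((pvOcc requests k).length : Int) ≤ pvAdvance (pvOcc requests k) i p))]
      constructor
      · intro h; cases h
      · intro h
        exfalso
        rw [pvLive_iff, hf] at h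
        simp at h
    · rw [if_neg hql, hval]
      unfold pvNextGE
      rw [hf]
      rfl

-- ---------- popMin ----------

theorem pvTripLt_irrefl (a : Int × Int × Int) : pvTripLt a a = false := by
  simp [pvTripLt]

theorem pvTripLt_asymm {a b : Int × Int × Int} (h : pvTripLt a b = true) : pvTripLt b a = false := by
  simp only [pvTripLt, decide_eq_true_eq, decide_eq_false_iff_not] at *
  omega

theorem pvTripLt_false_trans {a b c : Int × Int × Int}
    (h1 : pvTripLt a b = false) (h2 : pvTripLt b c = false) : pvTripLt a c = false := by
  simp only [pvTripLt, decide_eq_false_iff_not] at *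
  omega

theorem pvPopMin_none_iff {heap : List (Int × Int × Int)} : pvPopMin heap = none ↔ heap = [] := by
  cases heap with
  | nil => simp [pvPopMin]
  | cons x xs =>
    simp only [pvPopMin]
    cases hx : pvPopMin xs with
    | none => simp
    | some mr => by_cases h : pvTripLt mr.1 x <;> simp [h]

theorem pvPopMin_spec {heap : List (Int × Int × Int)} {e rest}
    (h : pvPopMin heap = some (e, rest)) :
    (∃ pre suf, heap = pre ++ e :: suf ∧ rest = pre ++ suf) ∧
    ∀ y ∈ heap, pvTripLt y e = false := by
  induction heap generalizing e rest with
  | nil => simp [pvPopMin] at h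
  | cons x xs ih =>
    simp only [pvPopMin] at h
    cases hx : pvPopMin xs with
    | none =>
      rw [hx] at h
      obtain ⟨h1, h2⟩ := Prod.mk.injEq .. ▸ (Option.some.injEq .. ▸ h)
      subst h1
      have hnil : xs = [] := pvPopMin_none_iff.mp hx
      subst hnil
      refine ⟨⟨[], [], by simp, by simp [← h2]⟩, ?_⟩
      intro y hy
      simp at hy
      subst hy
      exact pvTripLt_irrefl _
    | some mr =>
      rw [hx] at h
      obtain ⟨m, rest'⟩ := mr
      obtain ⟨⟨pre, suf, hxs, hrest'⟩, hmin⟩ := ih (hx)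
      by_cases hlt : pvTripLt m x
      · simp only [hlt, if_pos] at h
        obtain ⟨h1, h2⟩ := Prod.mk.injEq .. ▸ (Option.some.injEq .. ▸ h)
        subst h1
        refine ⟨⟨x :: pre, suf, by simp [hxs], by simp [← h2, hrest']⟩, ?_⟩
        intro y hy
        rcases List.mem_cons.mp hy with hy | hy
        · subst hy; exact pvTripLt_asymm hlt
        · exact hmin y hy
      · simp only [hlt, if_neg, Bool.false_eq_true, not_false_iff] at h
        obtain ⟨h1, h2⟩ := Prod.mk.injEq .. ▸ (Option.some.injEq .. ▸ h)
        subst h1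
        refine ⟨⟨[], xs, by simp, by simp [← h2]⟩, ?_⟩
        intro y hy
        rcases List.mem_cons.mp hy with hy | hy
        · subst hy; exact pvTripLt_irrefl _
        · exact pvTripLt_false_trans (hmin y hy) (by simpa using hlt)

-- two members of a pairwise list are equal or related one way or the other
theorem pvPairwise_total {α : Type} {R : α → α → Prop} {l : List α} (h : l.Pairwise R)
    {a b : α} (ha : a ∈ l) (hb : b ∈ l) : a = b ∨ R a b ∨ R b a := by
  induction l with
  | nil => cases ha
  | cons x xs ih =>
    rcases List.pairwise_cons.mp h with ⟨hx, hxs⟩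
    rcases List.mem_cons.mp ha with ha' | ha' <;> rcases List.mem_cons.mp hb with hb' | hb'
    · subst ha'; subst hb'; exact Or.inl rfl
    · subst ha'; exact Or.inr (Or.inl (hx b hb'))
    · subst hb'; exact Or.inr (Or.inr (hx a ha'))
    · exact ih hxs ha' hb'

-- ---------- Dict.erase / size facts (not provided by the prelude) ----------

theorem pvFindFilterErase {ν : Type} (k k' : Int) : ∀ (items : List (Int × ν)),
    (items.filter (fun p => !(p.1 == k))).find? (fun p => p.1 == k')
      = if k' = k then none else items.find? (fun p => p.1 == k')
  | [] => by by_cases h3 : k' = k <;> simp [h3]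
  | p :: ps => by
    have ih := pvFindFilterErase k k' ps
    by_cases hk : p.1 = k
    · rw [List.filter_cons, if_neg (by simp [hk]), ih]
      by_cases h3 : k' = k
      · rw [if_pos h3, if_pos h3]
      · rw [if_neg h3, if_neg h3, List.find?_cons_of_neg (by simp [hk]; exact fun h => h3 h.symm)]
    · rw [List.filter_cons, if_pos (by simp [hk])]
      by_cases hk' : p.1 = k'
      · rw [List.find?_cons_of_pos (by simp [hk']),
          if_neg (fun h3 => hk (by rw [hk', h3])),
          List.find?_cons_of_pos (by simp [hk'])]
      · rw [List.find?_cons_of_neg (by simp [hk']), ih]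
        by_cases h3 : k' = k
        · rw [if_pos h3, if_pos h3]
        · rw [if_neg h3, if_neg h3, List.find?_cons_of_neg (by simp [hk'])]

theorem pvDict_get?_erase {ν : Type} (d : PySem.Dict Int ν) (k k' : Int) :
    (d.erase k).get? k' = if k' = k then none else d.get? k' := by
  obtain ⟨items⟩ := d
  simp only [PySem.Dict.erase, PySem.Dict.get?]
  rw [pvFindFilterErase k k' items]
  by_cases h3 : k' = k <;> simp [h3]

theorem pvDict_contains_erase {ν : Type} (d : PySem.Dict Int ν) (k k' : Int) :
    (d.erase k).contains k' = (decide (k' ≠ k) && d.contains k') := by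
  rw [PySem.Dict.contains_eq_isSome_get?, PySem.Dict.contains_eq_isSome_get?, pvDict_get?_erase]
  by_cases h : k' = k <;> simp [h]

theorem pvDict_nodup_keys_erase {ν : Type} (d : PySem.Dict Int ν) (k : Int)
    (h : d.keys.Nodup) : (d.erase k).keys.Nodup := by
  apply List.Nodup.sublist _ h
  exact List.Sublist.map _ List.filter_sublist

theorem pvDict_keys_length {ν : Type} (d : PySem.Dict Int ν) : d.keys.length = d.size := by
  simp [PySem.Dict.keys, PySem.Dict.size]

theorem pvDict_size_erase {ν : Type} (d : PySem.Dict Int ν) (k : Int)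
    (hmem : k ∈ d.keys) (hnd : d.keys.Nodup) : (d.erase k).size + 1 = d.size := by
  have hcnt : List.countP (fun p => p.1 == k) d.items = 1 := by
    have h1 : List.countP (fun p => p.1 == k) d.items
        = List.countP (fun x => x == k) (d.items.map (fun p => p.1)) := by
      rw [List.countP_map]
      rfl
    rw [h1]
    have : (d.items.map (fun p : Int × ν => p.1)).count k = 1 :=
      List.count_eq_one_of_mem (by simpa [PySem.Dict.keys] using hnd)
        (by simpa [PySem.Dict.keys] using hmem)
    simpa [List.count] using this
  have hlen := List.length_eq_countP_add_countP (fun p : Int × ν => p.1 == k) (l := d.items)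
  have hfl : (List.filter (fun p : Int × ν => !(p.1 == k)) d.items).length
      = List.countP (fun p : Int × ν => decide ¬(p.1 == k) = true) d.items := by
    rw [← List.countP_eq_length_filter]
    apply List.countP_congr
    intro p _
    cases h : (p.1 == k) <;> simp [h]
  simp only [PySem.Dict.erase, PySem.Dict.size]
  rw [hfl]
  omega

theorem pvSet_length_discard {s : PySem.Set Int} {x : Int}
    (hmem : x ∈ s) (hnd : s.Nodup) : (PySem.Set.discard s x).length + 1 = s.length := by
  have hcnt : List.countP (fun y => y == x) s = 1 := by
    have : s.count x = 1 := List.count_eq_one_of_mem hnd hmem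
    simpa [List.count] using this
  have hlen := List.length_eq_countP_add_countP (fun y : Int => y == x) (l := s)
  have hfl : (PySem.Set.discard s x).length
      = List.countP (fun y : Int => decide ¬(y == x) = true) s := by
    show (List.filter (fun y => !y == x) s).length = _
    rw [← List.countP_eq_length_filter]
    apply List.countP_congr
    intro p _
    cases h : (p == x) <;> simp [h]
  rw [hfl]
  omega

-- transfer of "some member fails P" between two equally-sized nodup lists that
-- agree on members satisfying P
theorem pvDead_transfer {p : Int → Bool} {l1 l2 : List Int}
    (h1 : l1.Nodup) (h2 : l2.Nodup) (hiff : ∀ k, p k = true → (k ∈ l1 ↔ k ∈ l2))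
    (hlen : l1.length = l2.length) {w : Int} (hw : w ∈ l1) (hnw : p w = false) :
    ∃ d ∈ l2, p d = false := by
  have hperm : (l1.filter p).Perm (l2.filter p) := by
    apply (List.perm_ext_iff_of_nodup (List.Nodup.filter _ h1) (List.Nodup.filter _ h2)).mpr
    intro x
    simp only [List.mem_filter]
    constructor
    · rintro ⟨hx, hp⟩; exact ⟨(hiff x hp).mp hx, hp⟩
    · rintro ⟨hx, hp⟩; exact ⟨(hiff x hp).mpr hx, hp⟩
  have hf1 : (l1.filter p).length < l1.length :=
    List.length_filter_lt_length_iff_exists.mpr ⟨w, hw, by simp [hnw]⟩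
  have hf2 : (l2.filter p).length < l2.length := by
    rw [← hperm.length_eq]
    omega
  obtain ⟨d, hd, hnd⟩ := List.length_filter_lt_length_iff_exists.mp hf2
  exact ⟨d, hd, by simpa using hnd⟩

-- ---------- B's argmax scan ----------

theorem pvPairLt_false_trans {a b c : Int × Int}
    (h1 : pvPairLt a b = false) (h2 : pvPairLt b c = false) : pvPairLt a c = false := by
  simp only [pvPairLt, decide_eq_false_iff_not] at *
  omega

theorem pvPairLt_irrefl (a : Int × Int) : pvPairLt a a = false := by
  simp [pvPairLt]

theorem pvPairLt_asymm' {a b : Int × Int} (h : pvPairLt a b = true) : pvPairLt b a = false := by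
  simp only [pvPairLt, decide_eq_true_eq, decide_eq_false_iff_not] at *
  omega

theorem pvVictimFold (lp : PySem.Dict Int Int) :
    ∀ (l : List (Int × Int)) (acc : Option (Int × (Int × Int))),
    (match l.foldl (fun acc kv =>
        let cand := (kv.2, -(lp.getD kv.1 0))
        match acc with
        | none => some (kv.1, cand)
        | some vb => if pvPairLt vb.2 cand then some (kv.1, cand) else some vb) acc with
     | none => l = [] ∧ acc = none
     | some vb =>
        ((∃ kv ∈ l, vb = (kv.1, (kv.2, -(lp.getD kv.1 0)))) ∨ acc = some vb)
        ∧ (∀ kv ∈ l, pvPairLt vb.2 (kv.2, -(lp.getD kv.1 0)) = false)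
        ∧ (∀ a0, acc = some a0 → pvPairLt vb.2 a0.2 = false)) := by
  intro l
  induction l with
  | nil =>
    intro acc
    cases acc with
    | none => simp
    | some a0 =>
      simp only [List.foldl_nil]
      exact ⟨Or.inr trivial, fun kv hkv => absurd hkv List.not_mem_nil, fun a0' ha0' => by
        cases ha0'; exact pvPairLt_irrefl _⟩
  | cons kv l ih =>
    intro acc
    rw [List.foldl_cons]
    cases acc with
    | none =>
      have h := ih (some (kv.1, (kv.2, -(lp.getD kv.1 0))))
      simp only at h ⊢
      cases hres : (l.foldl _ (some (kv.1, (kv.2, -(lp.getD kv.1 0))))) with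
      | none => rw [hres] at h; exact absurd h.2 (by simp)
      | some vb =>
        rw [hres] at h
        obtain ⟨horig, hminl, hmina⟩ := h
        refine ⟨?_, ?_, by simp⟩
        · rcases horig with ⟨kv', hkv', hvb⟩ | hvb
          · exact Or.inl ⟨kv', List.mem_cons_of_mem kv hkv', hvb⟩
          · exact Or.inl ⟨kv, List.mem_cons_self, by injection hvb with h; rw [h]⟩
        · intro kv' hkv'
          rcases List.mem_cons.mp hkv' with h' | h'
          · subst h'
            exact hmina _ rfl
          · exact hminl kv' h'
    | some a0 =>
      by_cases hlt : pvPairLt a0.2 (kv.2, -(lp.getD kv.1 0))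
      · have h := ih (some (kv.1, (kv.2, -(lp.getD kv.1 0))))
        simp only [hlt, if_pos] at h ⊢
        cases hres : (l.foldl _ (some (kv.1, (kv.2, -(lp.getD kv.1 0))))) with
        | none => rw [hres] at h; exact absurd h.2 (by simp)
        | some vb =>
          rw [hres] at h
          obtain ⟨horig, hminl, hmina⟩ := h
          have hkvmin : pvPairLt vb.2 (kv.2, -(lp.getD kv.1 0)) = false := hmina _ rfl
          refine ⟨?_, ?_, ?_⟩
          · rcases horig with ⟨kv', hkv', hvb⟩ | hvb
            · exact Or.inl ⟨kv', List.mem_cons_of_mem kv hkv', hvb⟩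
            · exact Or.inl ⟨kv, List.mem_cons_self, by injection hvb with h; rw [h]⟩
          · intro kv' hkv'
            rcases List.mem_cons.mp hkv' with h' | h'
            · subst h'; exact hkvmin
            · exact hminl kv' h'
          · intro a0' ha0'
            cases ha0'
            refine pvPairLt_false_trans hkvmin ?_
            exact pvPairLt_asymm' hlt
      · have h := ih (some a0)
        simp only [hlt, if_neg, Bool.false_eq_true, not_false_iff] at h ⊢
        cases hres : (l.foldl _ (some a0)) with
        | none => rw [hres] at h; exact absurd h.2 (by simp)
        | some vb =>
          rw [hres] at h
          obtain ⟨horig, hminl, hmina⟩ := h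
          have ha0min : pvPairLt vb.2 a0.2 = false := hmina _ rfl
          refine ⟨?_, ?_, ?_⟩
          · rcases horig with ⟨kv', hkv', hvb⟩ | hvb
            · exact Or.inl ⟨kv', List.mem_cons_of_mem kv hkv', hvb⟩
            · exact Or.inr hvb
          · intro kv' hkv'
            rcases List.mem_cons.mp hkv' with h' | h'
            · subst h'
              exact pvPairLt_false_trans ha0min (by simpa using hlt)
            · exact hminl kv' h'
          · intro a0' ha0'
            cases ha0'
            exact ha0min

theorem pvVictim_spec (nu lp : PySem.Dict Int Int) (hnodup : nu.keys.Nodup)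
    (hne : nu.items ≠ []) :
    pvVictim nu lp ∈ nu.keys ∧ ∀ k ∈ nu.keys,
      pvPairLt (nu.getD (pvVictim nu lp) 0, -(lp.getD (pvVictim nu lp) 0))
               (nu.getD k 0, -(lp.getD k 0)) = false := by
  have h := pvVictimFold lp nu.items none
  unfold pvVictim
  cases hres : (nu.items.foldl _ none) with
  | none =>
    rw [hres] at h
    exact absurd h.1 hne
  | some vb =>
    rw [hres] at h
    obtain ⟨horig, hminl, _⟩ := h
    rcases horig with ⟨kv, hkv, hvb⟩ | hvb
    · subst hvb
      simp only [Option.map_some, Option.getD_some]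
      have hkv2 : (kv.1, kv.2) ∈ nu.items := by simpa using hkv
      have hgd : nu.getD kv.1 0 = kv.2 := PySem.Dict.getD_of_mem_items nu hkv2 hnodup 0
      constructor
      · exact List.mem_map.mpr ⟨kv, hkv, rfl⟩
      · intro k hk
        obtain ⟨kv', hkv', hk'⟩ := List.mem_map.mp hk
        have hkv2' : (kv'.1, kv'.2) ∈ nu.items := by simpa using hkv'
        have hgd' : nu.getD k 0 = kv'.2 := by
          rw [← hk']
          exact PySem.Dict.getD_of_mem_items nu hkv2' hnodup 0
        have := hminl kv' hkv'
        rw [hgd, hgd']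
        rw [← hk']
        simpa using this
    · cases hvb

-- the victim is unique (both candidates maximal forces equal next use and equal
-- last occurrence, hence the same key)
theorem pvIsVict_unique {requests : List Int} {i : Int} {cache : List Int} {w w' : Int}
    (hseen : ∀ k ∈ cache, (pvLastOcc? requests i k).isSome)
    (h : pvIsVict requests i cache w) (h' : pvIsVict requests i cache w') : w = w' := by
  obtain ⟨hwm, hwmin⟩ := h
  obtain ⟨hwm', hwmin'⟩ := h'
  have h1 := hwmin w' hwm'
  have h2 := hwmin' w hwm
  have hl : pvLastOccD requests i w = pvLastOccD requests i w' := by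
    simp only [pvPairLt, pvCand, decide_eq_false_iff_not] at h1 h2
    omega
  obtain ⟨o, ho⟩ := Option.isSome_iff_exists.mp (hseen w hwm)
  obtain ⟨o', ho'⟩ := Option.isSome_iff_exists.mp (hseen w' hwm')
  have hd : pvLastOccD requests i w = o := by unfold pvLastOccD; rw [ho]; rfl
  have hd' : pvLastOccD requests i w' = o' := by unfold pvLastOccD; rw [ho']; rfl
  have hoo : o = o' := by omega
  exact pvOcc_inj (pvLastOcc?_mem ho).1 (hoo ▸ (pvLastOcc?_mem ho').1)

-- ---------- A's lazy-deletion eviction loop ----------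

-- one-step unfolding equations for the eviction loop
theorem pvEvictLoop_eq_skip (positions : PySem.Dict Int (List Int)) (ni : PySem.Dict Int Int)
    (heap : List (Int × Int × Int)) (cache : PySem.Set Int) (e : Int × Int × Int)
    (rest : List (Int × Int × Int)) (hpop : pvPopMin heap = some (e, rest))
    (hc : PySem.Set.contains cache e.2.2 = false) :
    pvEvictLoop positions ni heap cache = pvEvictLoop positions ni rest cache := by
  rw [pvEvictLoop]
  split
  · next h => rw [hpop] at h; cases h
  · next e' rest' h =>
    rw [hpop] at h
    injection h with h
    obtain ⟨h1, h2⟩ := Prod.mk.injEq .. ▸ h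
    subst h1; subst h2
    rw [if_pos hc]

theorem pvEvictLoop_eq_stale (positions : PySem.Dict Int (List Int)) (ni : PySem.Dict Int Int)
    (heap : List (Int × Int × Int)) (cache : PySem.Set Int) (e : Int × Int × Int)
    (rest : List (Int × Int × Int)) (hpop : pvPopMin heap = some (e, rest))
    (hc : ¬ PySem.Set.contains cache e.2.2 = false)
    (hv : ¬ (-e.1 = pvCurrNext positions ni e.2.2)) :
    pvEvictLoop positions ni heap cache = pvEvictLoop positions ni rest cache := by
  rw [pvEvictLoop]
  split
  · next h => rw [hpop] at h; cases h
  · next e' rest' h =>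
    rw [hpop] at h
    injection h with h
    obtain ⟨h1, h2⟩ := Prod.mk.injEq .. ▸ h
    subst h1; subst h2
    rw [if_neg hc, if_neg hv]

theorem pvEvictLoop_eq_evict (positions : PySem.Dict Int (List Int)) (ni : PySem.Dict Int Int)
    (heap : List (Int × Int × Int)) (cache : PySem.Set Int) (e : Int × Int × Int)
    (rest : List (Int × Int × Int)) (hpop : pvPopMin heap = some (e, rest))
    (hc : ¬ PySem.Set.contains cache e.2.2 = false)
    (hv : -e.1 = pvCurrNext positions ni e.2.2) :
    pvEvictLoop positions ni heap cache
      = (rest, (PySem.Set.remove? cache e.2.2).getD cache) := by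
  rw [pvEvictLoop]
  split
  · next h => rw [hpop] at h; cases h
  · next e' rest' h =>
    rw [hpop] at h
    injection h with h
    obtain ⟨h1, h2⟩ := Prod.mk.injEq .. ▸ h
    subst h1; subst h2
    rw [if_neg hc, if_pos hv]

theorem pvEvictLoop_nil (positions : PySem.Dict Int (List Int)) (ni : PySem.Dict Int Int)
    (heap : List (Int × Int × Int)) :
    pvEvictLoop positions ni heap [] = ([], []) := by
  induction heap using pvEvictLoop.induct positions ni [] with
  | case1 heap h => rw [pvEvictLoop, h]; exact congrArg (·, []) (pvPopMin_none_iff.mp h)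
  | case2 heap e rest h hc ih => rw [pvEvictLoop, h]; simp only [hc, if_pos]; exact ih
  | case3 heap e rest h hc _ => exact absurd rfl hc
  | case4 heap e rest h hc _ ih => exact absurd rfl hc

-- STRONG eviction spec (used while i ≤ 10^9+1): A evicts exactly the candidate-maximal
-- key (farthest next use, ties by least recent last occurrence)
theorem pvEvictLoop_spec (requests : List Int) (i : Int) (ni : PySem.Dict Int Int)
    (heap : List (Int × Int × Int)) (cache : PySem.Set Int)
    (hne : cache ≠ [])
    (hcn : ∀ k ∈ cache, pvCurrNext (pvPositions requests) ni k = pvNextGE requests i k)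
    (hsentN : ∀ e ∈ heap, -e.1 = pvSENT → pvNextGE requests i e.2.2 = pvSENT)
    (hvalid : ∀ k ∈ cache, ∃ t, (-(pvNextGE requests i k), t, k) ∈ heap)
    (hsent : (heap.filter (fun e => -e.1 == pvSENT)).Pairwise
        (fun e e' => e.2.1 < e'.2.1 ∧
          (e.2.2 = e'.2.2 ∨ pvLastOccD requests i e.2.2 < pvLastOccD requests i e'.2.2))) :
    ∃ w H', pvEvictLoop (pvPositions requests) ni heap cache = (H', PySem.Set.discard cache w)
      ∧ pvIsVict requests i cache w
      ∧ H'.Sublist heap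
      ∧ (∀ e ∈ heap, e.2.2 ∈ cache → e.2.2 ≠ w → -e.1 = pvNextGE requests i e.2.2 → e ∈ H') := by
  revert hsentN hvalid hsent
  induction heap using pvEvictLoop.induct (pvPositions requests) ni cache with
  | case1 heap hpop =>
    intro hsentN hvalid hsent
    exfalso
    obtain ⟨k, hk⟩ := List.exists_mem_of_ne_nil cache hne
    obtain ⟨t, ht⟩ := hvalid k hk
    rw [pvPopMin_none_iff.mp hpop] at ht
    exact absurd ht List.not_mem_nil
  | case2 heap e rest hpop hc ih =>
    intro hsentN hvalid hsent
    obtain ⟨⟨pre, suf, hheap, hrest⟩, hmin⟩ := pvPopMin_spec hpop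
    have henc : e.2.2 ∉ cache := by
      intro hmem'
      rw [← PySem.Set.contains_iff cache e.2.2, hc] at hmem'
      cases hmem'
    have hrest_sub : rest.Sublist heap := by
      rw [hheap, hrest]
      exact List.Sublist.append_left (List.sublist_cons_self e suf) pre
    obtain ⟨w, H', heq, hvict, hsubl, hkeep⟩ := ih
      (fun e' he' hs => hsentN e' (hrest_sub.subset he') hs)
      (fun k hk => by
        obtain ⟨t, ht⟩ := hvalid k hk
        refine ⟨t, ?_⟩
        have hne' : (-(pvNextGE requests i k), t, k) ≠ e := by
          intro hcontra
          exact henc (hcontra ▸ hk)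
        rw [hheap] at ht
        rw [hrest]
        rcases List.mem_append.mp ht with h' | h'
        · exact List.mem_append.mpr (Or.inl h')
        · rcases List.mem_cons.mp h' with h'' | h''
          · exact absurd h'' hne'
          · exact List.mem_append.mpr (Or.inr h''))
      (List.Pairwise.sublist (List.Sublist.filter _ hrest_sub) hsent)
    refine ⟨w, H', ?_, hvict, hsubl.trans hrest_sub, ?_⟩
    · rw [pvEvictLoop_eq_skip _ _ _ _ _ _ hpop hc]
      exact heq
    · intro e' he' hc' hw' hv'
      have he'r : e' ∈ rest := by
        rw [hheap] at he'
        rw [hrest]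
        rcases List.mem_append.mp he' with h' | h'
        · exact List.mem_append.mpr (Or.inl h')
        · rcases List.mem_cons.mp h' with h'' | h''
          · exact absurd (h'' ▸ hc') henc
          · exact List.mem_append.mpr (Or.inr h'')
      exact hkeep e' he'r hc' hw' hv'
  | case3 heap e rest hpop hc hval =>
    intro hsentN hvalid hsent
    obtain ⟨⟨pre, suf, hheap, hrest⟩, hmin⟩ := pvPopMin_spec hpop
    have hrest_sub : rest.Sublist heap := by
      rw [hheap, hrest]
      exact List.Sublist.append_left (List.sublist_cons_self e suf) pre
    have hwc : e.2.2 ∈ cache := by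
      rw [← PySem.Set.contains_iff cache e.2.2]
      cases hcc : PySem.Set.contains cache e.2.2
      · exact absurd hcc hc
      · rfl
    have hcw : pvCurrNext (pvPositions requests) ni e.2.2 = pvNextGE requests i e.2.2 :=
      hcn _ hwc
    rw [hcw] at hval
    have heheap : e ∈ heap := by rw [hheap]; exact List.mem_append.mpr (Or.inr List.mem_cons_self)
    have hvict : pvIsVict requests i cache e.2.2 := by
      refine ⟨hwc, ?_⟩
      intro k hk
      obtain ⟨t, ht⟩ := hvalid k hk
      have hminf := hmin _ ht
      simp only [pvTripLt, decide_eq_false_iff_not] at hminf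
      -- e.1 = -(next of w)
      have he1 : e.1 = -(pvNextGE requests i e.2.2) := by omega
      have hkle : pvNextGE requests i k ≤ pvNextGE requests i e.2.2 := by omega
      simp only [pvPairLt, pvCand, decide_eq_false_iff_not]
      intro hcontra
      rcases hcontra with hlt | ⟨heqg, hlp⟩
      · omega
      · -- equal numeric next use
        by_cases hsw : pvNextGE requests i e.2.2 = pvSENT
        · -- both entries live in the sentinel class: compare through the push order
          have hein : e ∈ heap.filter (fun e => -e.1 == pvSENT) :=
            List.mem_filter.mpr ⟨heheap, by simp; omega⟩
          have hyin : (-(pvNextGE requests i k), t, k) ∈ heap.filter (fun e => -e.1 == pvSENT) :=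
            List.mem_filter.mpr ⟨ht, by simp; omega⟩
          rcases pvPairwise_total hsent hein hyin with heqy | hR | hR
          · -- same entry, same key
            have : e.2.2 = k := by rw [heqy]
            rw [this] at hlp
            omega
          · -- e pushed before k's valid entry
            rcases hR.2 with hk' | hk'
            · simp only at hk'
              rw [← hk'] at hlp
              omega
            · simp only at hk'
              omega
          · -- k's valid entry pushed before e: its tie is smaller, contradicting that
            -- e popped first among equal-value entries
            have ht' : t < e.2.1 := hR.1
            omega
        · -- finite equal next use: same occurrence index, same key
          have h1 := pvNextGE_mem_of_ne hsw
          have hks : pvNextGE requests i k ≠ pvSENT := by omega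
          have h2 := pvNextGE_mem_of_ne hks
          have hkw : k = e.2.2 := pvOcc_inj h2.1 (by rw [heqg] at h1; exact h1.1)
          subst hkw
          omega
    refine ⟨e.2.2, rest, ?_, hvict, hrest_sub, ?_⟩
    · rw [pvEvictLoop_eq_evict _ _ _ _ _ _ hpop hc (by rw [hcw]; exact hval)]
      rw [PySem.Set.remove?_of_mem hwc]
      rfl
    · intro e' he' hc' hw' hv'
      rw [hheap] at he'
      rw [hrest]
      rcases List.mem_append.mp he' with h' | h'
      · exact List.mem_append.mpr (Or.inl h')
      · rcases List.mem_cons.mp h' with h'' | h''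
        · exact absurd (congrArg (fun x => x.2.2) h'') hw'
        · exact List.mem_append.mpr (Or.inr h'')
  | case4 heap e rest hpop hc hval ih =>
    intro hsentN hvalid hsent
    obtain ⟨⟨pre, suf, hheap, hrest⟩, hmin⟩ := pvPopMin_spec hpop
    have hrest_sub : rest.Sublist heap := by
      rw [hheap, hrest]
      exact List.Sublist.append_left (List.sublist_cons_self e suf) pre
    have hwc : e.2.2 ∈ cache := by
      rw [← PySem.Set.contains_iff cache e.2.2]
      cases hcc : PySem.Set.contains cache e.2.2
      · exact absurd hcc hc
      · rfl
    obtain ⟨w, H', heq, hvict, hsubl, hkeep⟩ := ih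
      (fun e' he' hs => hsentN e' (hrest_sub.subset he') hs)
      (fun k hk => by
        obtain ⟨t, ht⟩ := hvalid k hk
        refine ⟨t, ?_⟩
        have hne' : (-(pvNextGE requests i k), t, k) ≠ e := by
          intro hcontra
          apply hval
          rw [← hcontra]
          simp only
          rw [hcn k hk]
          omega
        rw [hheap] at ht
        rw [hrest]
        rcases List.mem_append.mp ht with h' | h'
        · exact List.mem_append.mpr (Or.inl h')
        · rcases List.mem_cons.mp h' with h'' | h''
          · exact absurd h'' hne'
          · exact List.mem_append.mpr (Or.inr h''))
      (List.Pairwise.sublist (List.Sublist.filter _ hrest_sub) hsent)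
    refine ⟨w, H', ?_, hvict, hsubl.trans hrest_sub, ?_⟩
    · rw [pvEvictLoop_eq_stale _ _ _ _ _ _ hpop hc hval]
      exact heq
    · intro e' he' hc' hw' hv'
      have he'r : e' ∈ rest := by
        rw [hheap] at he'
        rw [hrest]
        rcases List.mem_append.mp he' with h' | h'
        · exact List.mem_append.mpr (Or.inl h')
        · rcases List.mem_cons.mp h' with h'' | h''
          · exfalso
            apply hval
            rw [h''] at hv'
            rw [hcn e.2.2 hwc]
            exact hv'
          · exact List.mem_append.mpr (Or.inr h'')
      exact hkeep e' he'r hc' hw' hv'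

-- WEAK eviction spec (any time): A evicts some cached key whose numeric next use is maximal
theorem pvEvictLoop_weak (requests : List Int) (i : Int) (ni : PySem.Dict Int Int)
    (heap : List (Int × Int × Int)) (cache : PySem.Set Int)
    (hne : cache ≠ [])
    (hcn : ∀ k ∈ cache, pvCurrNext (pvPositions requests) ni k = pvNextGE requests i k)
    (hvalid : ∀ k ∈ cache, ∃ t, (-(pvNextGE requests i k), t, k) ∈ heap) :
    ∃ w H', pvEvictLoop (pvPositions requests) ni heap cache = (H', PySem.Set.discard cache w)
      ∧ w ∈ cache
      ∧ (∀ k ∈ cache, pvNextGE requests i k ≤ pvNextGE requests i w)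
      ∧ (∀ e ∈ heap, e.2.2 ∈ cache → e.2.2 ≠ w → -e.1 = pvNextGE requests i e.2.2 → e ∈ H') := by
  revert hvalid
  induction heap using pvEvictLoop.induct (pvPositions requests) ni cache with
  | case1 heap hpop =>
    intro hvalid
    exfalso
    obtain ⟨k, hk⟩ := List.exists_mem_of_ne_nil cache hne
    obtain ⟨t, ht⟩ := hvalid k hk
    rw [pvPopMin_none_iff.mp hpop] at ht
    exact absurd ht List.not_mem_nil
  | case2 heap e rest hpop hc ih =>
    intro hvalid
    obtain ⟨⟨pre, suf, hheap, hrest⟩, hmin⟩ := pvPopMin_spec hpop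
    have henc : e.2.2 ∉ cache := by
      intro hmem'
      rw [← PySem.Set.contains_iff cache e.2.2, hc] at hmem'
      cases hmem'
    have hrest_sub : rest.Sublist heap := by
      rw [hheap, hrest]
      exact List.Sublist.append_left (List.sublist_cons_self e suf) pre
    obtain ⟨w, H', heq, hwc, hmax, hkeep⟩ := ih
      (fun k hk => by
        obtain ⟨t, ht⟩ := hvalid k hk
        refine ⟨t, ?_⟩
        have hne' : (-(pvNextGE requests i k), t, k) ≠ e := fun hcontra => henc (hcontra ▸ hk)
        rw [hheap] at ht
        rw [hrest]
        rcases List.mem_append.mp ht with h' | h'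
        · exact List.mem_append.mpr (Or.inl h')
        · rcases List.mem_cons.mp h' with h'' | h''
          · exact absurd h'' hne'
          · exact List.mem_append.mpr (Or.inr h''))
    refine ⟨w, H', ?_, hwc, hmax, ?_⟩
    · rw [pvEvictLoop_eq_skip _ _ _ _ _ _ hpop hc]
      exact heq
    · intro e' he' hc' hw' hv'
      have he'r : e' ∈ rest := by
        rw [hheap] at he'
        rw [hrest]
        rcases List.mem_append.mp he' with h' | h'
        · exact List.mem_append.mpr (Or.inl h')
        · rcases List.mem_cons.mp h' with h'' | h''
          · exact absurd (h'' ▸ hc') henc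
          · exact List.mem_append.mpr (Or.inr h'')
      exact hkeep e' he'r hc' hw' hv'
  | case3 heap e rest hpop hc hval =>
    intro hvalid
    obtain ⟨⟨pre, suf, hheap, hrest⟩, hmin⟩ := pvPopMin_spec hpop
    have hrest_sub : rest.Sublist heap := by
      rw [hheap, hrest]
      exact List.Sublist.append_left (List.sublist_cons_self e suf) pre
    have hwc : e.2.2 ∈ cache := by
      rw [← PySem.Set.contains_iff cache e.2.2]
      cases hcc : PySem.Set.contains cache e.2.2
      · exact absurd hcc hc
      · rfl
    have hcw := hcn _ hwc
    rw [hcw] at hval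
    refine ⟨e.2.2, rest, ?_, hwc, ?_, ?_⟩
    · rw [pvEvictLoop_eq_evict _ _ _ _ _ _ hpop hc (by rw [hcw]; exact hval)]
      rw [PySem.Set.remove?_of_mem hwc]
      rfl
    · intro k hk
      obtain ⟨t, ht⟩ := hvalid k hk
      have hminf := hmin _ ht
      simp only [pvTripLt, decide_eq_false_iff_not] at hminf
      omega
    · intro e' he' hc' hw' hv'
      rw [hheap] at he'
      rw [hrest]
      rcases List.mem_append.mp he' with h' | h'
      · exact List.mem_append.mpr (Or.inl h')
      · rcases List.mem_cons.mp h' with h'' | h''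
        · exact absurd (congrArg (fun x => x.2.2) h'') hw'
        · exact List.mem_append.mpr (Or.inr h'')
  | case4 heap e rest hpop hc hval ih =>
    intro hvalid
    obtain ⟨⟨pre, suf, hheap, hrest⟩, hmin⟩ := pvPopMin_spec hpop
    have hrest_sub : rest.Sublist heap := by
      rw [hheap, hrest]
      exact List.Sublist.append_left (List.sublist_cons_self e suf) pre
    have hwc : e.2.2 ∈ cache := by
      rw [← PySem.Set.contains_iff cache e.2.2]
      cases hcc : PySem.Set.contains cache e.2.2
      · exact absurd hcc hc
      · rfl
    obtain ⟨w, H', heq, hwc', hmax, hkeep⟩ := ih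
      (fun k hk => by
        obtain ⟨t, ht⟩ := hvalid k hk
        refine ⟨t, ?_⟩
        have hne' : (-(pvNextGE requests i k), t, k) ≠ e := by
          intro hcontra
          apply hval
          rw [← hcontra]
          simp only
          rw [hcn k hk]
          omega
        rw [hheap] at ht
        rw [hrest]
        rcases List.mem_append.mp ht with h' | h'
        · exact List.mem_append.mpr (Or.inl h')
        · rcases List.mem_cons.mp h' with h'' | h''
          · exact absurd h'' hne'
          · exact List.mem_append.mpr (Or.inr h''))
    refine ⟨w, H', ?_, hwc', hmax, ?_⟩
    · rw [pvEvictLoop_eq_stale _ _ _ _ _ _ hpop hc hval]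
      exact heq
    · intro e' he' hc' hw' hv'
      have he'r : e' ∈ rest := by
        rw [hheap] at he'
        rw [hrest]
        rcases List.mem_append.mp he' with h' | h'
        · exact List.mem_append.mpr (Or.inl h')
        · rcases List.mem_cons.mp h' with h'' | h''
          · exfalso
            apply hval
            rw [h''] at hv'
            rw [hcn e.2.2 hwc]
            exact hv'
          · exact List.mem_append.mpr (Or.inr h'')
      exact hkeep e' he'r hc' hw' hv'

-- ---------- the STRONG step (exact state correspondence, while i < 10^9+1) ----------

theorem pvStep_invS {cs : Int} {requests : List Int} {i : Int} {sa : PvStA} {sb : PvStB}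
    (hilt : i < pvSENT) (hi : 0 ≤ i) (hin : i < (requests.length : Int))
    (hinv : PvInvS requests i sa sb) :
    PvInvS requests (i + 1) (pvStepA (pvPositions requests) cs requests sa i)
                            (pvStepB (pvPositions requests) cs requests sb i) := by
  obtain ⟨nodupC, nodupK, hhits, hmemx, hcnA, hcnB, hseen, hlp, hsentN, hheapValid,
    hsent, htie, hptrA, hptrB⟩ := hinv
  simp only [pvStepA, pvStepB, pvTailA]
  generalize hkeyg : PySem.List.pyGetD requests i 0 = key
  have hpos : (pvPositions requests).getD key [] = pvOcc requests key :=
    pvPositions_getD requests key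
  have hgself : pvNextGE requests i key = i := pvNextGE_self hi hin hkeyg
  have hgne : ∀ k : Int, k ≠ key → pvNextGE requests (i + 1) k = pvNextGE requests i k := by
    intro k hk
    exact pvNextGE_succ_ne (fun h => hk (by rw [← hkeyg, h]))
  have hlone : ∀ k : Int, k ≠ key → pvLastOcc? requests (i + 1) k = pvLastOcc? requests i k := by
    intro k hk
    exact pvLastOcc?_succ_ne (fun h => hk (by rw [← hkeyg, h]))
  have hloself : pvLastOcc? requests (i + 1) key = some i := pvLastOcc?_succ_self hi hin hkeyg
  have hlodne : ∀ k : Int, k ≠ key → pvLastOccD requests (i + 1) k = pvLastOccD requests i k := by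
    intro k hk
    unfold pvLastOccD
    rw [hlone k hk]
  have hlodself : pvLastOccD requests (i + 1) key = i := by
    unfold pvLastOccD
    rw [hloself]
    rfl
  have hptrmono : ∀ (k p : Int), pvPtrOk requests i k p → pvPtrOk requests (i + 1) k p := by
    intro k p ⟨a, b, c⟩
    exact ⟨a, b, fun j hj => by have := c j hj; omega⟩
  have hkeyNotSent : ∀ e ∈ sa.heap, -e.1 = pvSENT → e.2.2 ≠ key := by
    intro e he hs hk
    have := hsentN e he hs
    rw [hk, hgself] at this
    omega
  have hfkey : ∀ a ∈ sa.heap.filter (fun e => -e.1 == pvSENT), a.2.2 ≠ key := by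
    intro a ha
    exact hkeyNotSent a (List.mem_of_mem_filter ha) (by simpa using (List.mem_filter.mp ha).2)
  have htrans : (sa.heap.filter (fun e => -e.1 == pvSENT)).Pairwise
      (fun e e' => e.2.1 < e'.2.1 ∧
        (e.2.2 = e'.2.2 ∨ pvLastOccD requests (i + 1) e.2.2 < pvLastOccD requests (i + 1) e'.2.2)) := by
    refine List.Pairwise.imp_of_mem ?_ hsent
    intro a b ha hb hr
    rcases hr with ⟨ht, hor⟩
    refine ⟨ht, ?_⟩
    rcases hor with hk | hlt
    · exact Or.inl hk
    · right
      rw [hlodne _ (hfkey a ha), hlodne _ (hfkey b hb)]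
      exact hlt
  -- the newly pushed entry filtered through the sentinel class
  have hnewfilter : ∀ t : Int,
      (([((-(pvNextGE requests (i + 1) key), t, key))]).filter (fun e => -e.1 == pvSENT))
      = if pvNextGE requests (i + 1) key = pvSENT
        then [((-(pvNextGE requests (i + 1) key), t, key))] else [] := by
    intro t
    by_cases hvs : pvNextGE requests (i + 1) key = pvSENT
    · rw [if_pos hvs, List.filter_cons, if_pos (by simp; omega)]
      rfl
    · rw [if_neg hvs, List.filter_cons, if_neg (by simp; omega)]
      rfl
  -- pointer advance on both sides
  obtain ⟨hptrA', hiffA, hvalA⟩ := pvAdvance_g (k := key) hi (hptrA key)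
  obtain ⟨hptrB', hiffB, hvalB⟩ := pvAdvance_g (k := key) hi (hptrB key)
  rw [hpos]
  by_cases hkc : key ∈ sa.cache
  · -- HIT
    have h1 : PySem.Set.contains sa.cache key = true := (PySem.Set.contains_iff _ _).mpr hkc
    have h2 : sb.nu.contains key = true := (hmemx key).mp hkc
    rw [if_pos h1, if_pos h2]
    have hvB : (if pvAdvance (pvOcc requests key) i (sb.ptr.getD key 0) < ((pvOcc requests key).length : Int)
        then PySem.List.pyGetD (pvOcc requests key) (pvAdvance (pvOcc requests key) i (sb.ptr.getD key 0)) 0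
        else pvSENT) = pvNextGE requests (i + 1) key := by
      by_cases hq : pvAdvance (pvOcc requests key) i (sb.ptr.getD key 0) < ((pvOcc requests key).length : Int)
      · rw [if_pos hq]
        rw [if_neg (by omega)] at hvalB
        exact hvalB
      · rw [if_neg hq]
        rw [if_pos (by omega)] at hvalB
        exact hvalB
    simp only [hvalA, hvB]
    refine ⟨nodupC, PySem.Dict.nodup_keys_insert _ _ _ nodupK, by simp [hhits], ?_, ?_, ?_, ?_, ?_, ?_, ?_, ?_, ?_, ?_, ?_⟩
    · intro k
      rw [PySem.Dict.contains_insert]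
      by_cases hkk : k = key
      · subst hkk
        simp [hkc]
      · simp only [beq_eq_false_iff_ne.mpr hkk, Bool.false_or]
        exact hmemx k
    · intro k hk
      by_cases hkk : k = key
      · subst hkk
        unfold pvCurrNext
        rw [hpos, PySem.Dict.getD_insert, if_pos rfl]
        exact hvalA
      · unfold pvCurrNext at hcnA ⊢
        rw [PySem.Dict.getD_insert, if_neg hkk, hgne k hkk]
        exact hcnA k hk
    · intro k hk
      by_cases hkk : k = key
      · subst hkk
        rw [PySem.Dict.getD_insert, if_pos rfl]
      · rw [PySem.Dict.getD_insert, if_neg hkk, hgne k hkk]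
        exact hcnB k hk
    · intro k hk
      by_cases hkk : k = key
      · subst hkk
        rw [hloself]
        rfl
      · rw [hlone k hkk]
        exact hseen k hk
    · intro k
      rw [PySem.Dict.get?_insert]
      by_cases hkk : k = key
      · rw [if_pos hkk, hkk, hloself]
      · rw [if_neg hkk, hlone k hkk]
        exact hlp k
    · -- sentN
      intro e he hs
      rcases List.mem_append.mp he with hold | hnew
      · have hne := hkeyNotSent e hold hs
        rw [hgne _ hne]
        exact hsentN e hold hs
      · rcases List.mem_cons.mp hnew with hnew | hff
        · subst hnew
          simp only at hs ⊢
          omega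
        · cases hff
    · -- heapValid
      intro k hk
      by_cases hkk : k = key
      · subst hkk
        exact ⟨sa.tie, List.mem_append.mpr (Or.inr List.mem_cons_self)⟩
      · obtain ⟨t, ht⟩ := hheapValid k hk
        refine ⟨t, List.mem_append.mpr (Or.inl ?_)⟩
        rw [hgne k hkk]
        exact ht
    · -- sent
      rw [List.filter_append, hnewfilter]
      by_cases hvs : pvNextGE requests (i + 1) key = pvSENT
      · rw [if_pos hvs, List.pairwise_append]
        refine ⟨htrans, List.pairwise_singleton _ _, ?_⟩
        intro a ha b hb
        rcases List.mem_cons.mp hb with hb | hb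
        · subst hb
          refine ⟨htie a (List.mem_of_mem_filter ha), Or.inr ?_⟩
          simp only
          rw [hlodne _ (hfkey a ha), hlodself]
          exact pvLastOccD_lt hi
        · cases hb
      · rw [if_neg hvs, List.append_nil]
        exact htrans
    · -- tie
      intro e he
      rcases List.mem_append.mp he with hold | hnew
      · have := htie e hold
        simp only
        omega
      · rcases List.mem_cons.mp hnew with hnew | hff
        · subst hnew
          simp only
          omega
        · cases hff
    · intro k
      by_cases hkk : k = key
      · subst hkk
        rw [PySem.Dict.getD_insert, if_pos rfl]
        exact hptrA'
      · rw [PySem.Dict.getD_insert, if_neg hkk]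
        exact hptrmono k _ (hptrA k)
    · intro k
      by_cases hkk : k = key
      · subst hkk
        rw [PySem.Dict.getD_insert, if_pos rfl]
        exact hptrB'
      · rw [PySem.Dict.getD_insert, if_neg hkk]
        exact hptrmono k _ (hptrB k)
  · -- MISS
    have h1 : PySem.Set.contains sa.cache key = false := by
      cases hcc : PySem.Set.contains sa.cache key
      · rfl
      · exact absurd ((PySem.Set.contains_iff _ _).mp hcc) hkc
    have h2 : sb.nu.contains key = false := by
      cases hcc : sb.nu.contains key
      · rfl
      · exact absurd ((hmemx key).mpr hcc) hkc
    rw [if_neg (show ¬ (PySem.Set.contains sa.cache key = true) by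
          rw [h1]; exact fun h => Bool.false_ne_true h),
        if_neg (show ¬ (sb.nu.contains key = true) by
          rw [h2]; exact fun h => Bool.false_ne_true h)]
    by_cases hnf : pvLive requests (i + 1) key
    · -- INSERT: the key is requested again
      have hAcond : ¬ ((pvOcc requests key).length : Int) ≤ pvAdvance (pvOcc requests key) i (sa.ni.getD key 0) := by
        intro hcon
        exact (hiffA.mp hcon) hnf
      have hBq : pvAdvance (pvOcc requests key) i (sb.ptr.getD key 0) < ((pvOcc requests key).length : Int) := by
        by_contra hcon
        exact (hiffB.mp (by omega)) hnf
      rw [if_neg hAcond, if_pos hBq]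
      have hvge : i + 1 ≤ pvNextGE requests (i + 1) key := by
        rcases pvNextGE_spec requests (i + 1) key with hs | ⟨_, hge, _⟩
        · exact absurd (pvLive_iff.mp hnf) (by rw [hs]; simp)
        · exact hge
      have hgdii : (sa.ni.insert key (pvAdvance (pvOcc requests key) i (sa.ni.getD key 0))).getD key 0
          = pvAdvance (pvOcc requests key) i (sa.ni.getD key 0) := by
        rw [PySem.Dict.getD_insert, if_pos rfl]
      rw [hgdii]
      have hvA2 : PySem.List.pyGetD (pvOcc requests key) (pvAdvance (pvOcc requests key) i (sa.ni.getD key 0)) 0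
          = pvNextGE requests (i + 1) key := by
        rw [if_neg hAcond] at hvalA
        exact hvalA
      have hvB2 : PySem.List.pyGetD (pvOcc requests key) (pvAdvance (pvOcc requests key) i (sb.ptr.getD key 0)) 0
          = pvNextGE requests (i + 1) key := by
        rw [if_neg (by omega)] at hvalB
        exact hvalB
      have hfix : pvAdvance (pvOcc requests key) i (pvAdvance (pvOcc requests key) i (sa.ni.getD key 0))
          = pvAdvance (pvOcc requests key) i (sa.ni.getD key 0) := by
        rw [pvAdvance, dif_neg]
        intro ⟨hl, hle⟩
        rw [hvA2] at hle
        omega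
      rw [hfix, PySem.Dict.insert_insert_self, hvalA, hvA2, hvB2]
      have hknc : ∀ k ∈ sa.cache, k ≠ key := fun k hk hkk => hkc (hkk ▸ hk)
      have hperm : sa.cache.Perm sb.nu.keys :=
        (List.perm_ext_iff_of_nodup nodupC nodupK).mpr
          (fun x => by rw [hmemx x, PySem.Dict.contains_iff_mem_keys])
      have hlen2 : sa.cache.length = sb.nu.size := by
        rw [hperm.length_eq]
        exact pvDict_keys_length sb.nu
      by_cases htrig : cs ≤ PySem.Set.len sa.cache
      · -- eviction branch taken by A
        by_cases hcnil : sa.cache = []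
        · -- empty cache: A drains the heap, B has nothing to evict
          have hB0 : ¬ (cs ≤ (sb.nu.size : Int) ∧ sb.nu.size ≠ 0) := by
            intro ⟨_, hsz⟩
            apply hsz
            rw [← hlen2, hcnil]
            rfl
          rw [if_pos htrig, if_neg hB0, hcnil, pvEvictLoop_nil]
          simp only [List.nil_append, List.singleton_append]
          refine ⟨?_, PySem.Dict.nodup_keys_insert _ _ _ nodupK, hhits, ?_, ?_, ?_, ?_, ?_, ?_, ?_, ?_, ?_, ?_, ?_⟩
          · exact PySem.Set.nodup_add [] key List.nodup_nil
          · intro k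
            rw [PySem.Dict.contains_insert, PySem.Set.mem_add]
            by_cases hkk : k = key
            · simp [hkk]
            · simp only [beq_eq_false_iff_ne.mpr hkk, Bool.false_or]
              rw [← hmemx k]
              simp [hkk, hcnil]
          · intro k hk
            rcases (PySem.Set.mem_add [] key k).mp hk with hk' | hk'
            · cases hk'
            · subst hk'
              unfold pvCurrNext
              rw [hpos, PySem.Dict.getD_insert, if_pos rfl, if_neg hAcond, hvA2]
          · intro k hk
            rcases (PySem.Set.mem_add [] key k).mp hk with hk' | hk'
            · cases hk'
            · subst hk'
              rw [PySem.Dict.getD_insert, if_pos rfl]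
          · intro k hk
            rcases (PySem.Set.mem_add [] key k).mp hk with hk' | hk'
            · cases hk'
            · subst hk'
              rw [hloself]
              rfl
          · intro k
            rw [PySem.Dict.get?_insert]
            by_cases hkk : k = key
            · rw [if_pos hkk, hkk, hloself]
            · rw [if_neg hkk, hlone k hkk]
              exact hlp k
          · -- sentN
            intro e he hs
            rcases List.mem_cons.mp he with he' | he'
            · subst he'
              simp only at hs ⊢
              omega
            · rcases List.mem_cons.mp he' with he'' | he''
              · subst he''
                simp only at hs ⊢
                omega
              · cases he''
          · intro k hk
            rcases (PySem.Set.mem_add [] key k).mp hk with hk' | hk'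
            · cases hk'
            · subst hk'
              exact ⟨sa.tie, by simp⟩
          · -- sent: the heap holds just the two fresh same-key entries
            by_cases hvs : pvNextGE requests (i + 1) key = pvSENT
            · rw [List.filter_cons, if_pos (by simp; omega), List.filter_cons,
                if_pos (by simp; omega), List.filter_nil]
              refine List.pairwise_cons.mpr ⟨?_, List.pairwise_singleton _ _⟩
              intro b hb
              rcases List.mem_cons.mp hb with hb | hb
              · subst hb
                exact ⟨by simp, Or.inl rfl⟩
              · cases hb
            · rw [List.filter_cons, if_neg (by simp; omega), List.filter_cons,
                if_neg (by simp; omega), List.filter_nil]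
              exact List.Pairwise.nil
          · intro e he
            rcases List.mem_cons.mp he with he' | he'
            · subst he'; simp only; omega
            · rcases List.mem_cons.mp he' with he'' | he''
              · subst he''; simp only; omega
              · cases he''
          · intro k
            by_cases hkk : k = key
            · subst hkk
              rw [PySem.Dict.getD_insert, if_pos rfl]
              exact hptrA'
            · rw [PySem.Dict.getD_insert, if_neg hkk]
              exact hptrmono k _ (hptrA k)
          · intro k
            by_cases hkk : k = key
            · subst hkk
              rw [PySem.Dict.getD_insert, if_pos rfl]
              exact hptrB'
            · rw [PySem.Dict.getD_insert, if_neg hkk]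
              exact hptrmono k _ (hptrB k)
        · -- nonempty cache: both sides evict the same victim
          obtain ⟨w, H', heq, hvict, hsubl, hkeep⟩ :=
            pvEvictLoop_spec requests i sa.ni sa.heap sa.cache hcnil hcnA hsentN hheapValid hsent
          have hB1 : cs ≤ (sb.nu.size : Int) ∧ sb.nu.size ≠ 0 := by
            constructor
            · rw [← hlen2]
              simpa [PySem.Set.len] using htrig
            · rw [← hlen2]
              intro h0
              exact hcnil (List.length_eq_zero_iff.mp h0)
          have hitems : sb.nu.items ≠ [] := by
            intro h0
            apply hB1.2
            simp [PySem.Dict.size, h0]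
          have hlpd : ∀ k ∈ sa.cache, sb.lp.getD k 0 = pvLastOccD requests i k := by
            intro k hk
            obtain ⟨o, ho⟩ := Option.isSome_iff_exists.mp (hseen k hk)
            rw [PySem.Dict.getD_eq_get?_getD, hlp k, ho]
            unfold pvLastOccD
            rw [ho]
            rfl
          obtain ⟨hvmem, hvmax⟩ := pvVictim_spec sb.nu sb.lp nodupK hitems
          have hvcache : pvVictim sb.nu sb.lp ∈ sa.cache := by
            rw [hmemx _, PySem.Dict.contains_iff_mem_keys]
            exact hvmem
          have hvictB : pvIsVict requests i sa.cache (pvVictim sb.nu sb.lp) := by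
            refine ⟨hvcache, ?_⟩
            intro k hk
            have := hvmax k ((PySem.Dict.contains_iff_mem_keys _ _).mp ((hmemx k).mp hk))
            unfold pvCand
            rw [← hcnB k hk, ← hcnB _ hvcache, ← hlpd k hk, ← hlpd _ hvcache]
            exact this
          have hww : w = pvVictim sb.nu sb.lp := pvIsVict_unique hseen hvict hvictB
          rw [if_pos htrig, heq, if_pos hB1, ← hww]
          have hwc : w ∈ sa.cache := hvict.1
          have hgde : ∀ k : Int, k ≠ w → (sb.nu.erase w).getD k 0 = sb.nu.getD k 0 := by
            intro k hkw
            rw [PySem.Dict.getD_eq_get?_getD, PySem.Dict.getD_eq_get?_getD, pvDict_get?_erase,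
              if_neg hkw]
          have hHfilter : (H'.filter (fun e => -e.1 == pvSENT)).Sublist
              (sa.heap.filter (fun e => -e.1 == pvSENT)) := List.Sublist.filter _ hsubl
          refine ⟨?_, PySem.Dict.nodup_keys_insert _ _ _ (pvDict_nodup_keys_erase _ _ nodupK),
            hhits, ?_, ?_, ?_, ?_, ?_, ?_, ?_, ?_, ?_, ?_, ?_⟩
          · exact PySem.Set.nodup_add _ _ (PySem.Set.nodup_discard _ _ nodupC)
          · intro k
            rw [PySem.Dict.contains_insert, PySem.Set.mem_add, PySem.Set.mem_discard,
              pvDict_contains_erase]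
            by_cases hkk : k = key
            · simp [hkk]
            · simp only [beq_eq_false_iff_ne.mpr hkk, Bool.false_or]
              by_cases hkw : k = w
              · simp [hkw, hkk]
                exact fun h => hkc (h ▸ hwc)
              · rw [Bool.and_eq_true, decide_eq_true_eq, ← hmemx k]
                constructor
                · rintro (⟨ha', hb'⟩ | ha')
                  · exact ⟨hb', ha'⟩
                  · exact absurd ha' hkk
                · rintro ⟨ha', hb'⟩
                  exact Or.inl ⟨hb', ha'⟩
          · intro k hk
            rcases (PySem.Set.mem_add (PySem.Set.discard sa.cache w) key k).mp hk with hk' | hk'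
            · have hkc2 := (PySem.Set.mem_discard _ _ _).mp hk'
              have hknk := hknc k hkc2.1
              unfold pvCurrNext at hcnA ⊢
              rw [PySem.Dict.getD_insert, if_neg hknk, hgne k hknk]
              exact hcnA k hkc2.1
            · subst hk'
              unfold pvCurrNext
              rw [hpos, PySem.Dict.getD_insert, if_pos rfl, if_neg hAcond, hvA2]
          · intro k hk
            rcases (PySem.Set.mem_add (PySem.Set.discard sa.cache w) key k).mp hk with hk' | hk'
            · have hkc2 := (PySem.Set.mem_discard _ _ _).mp hk'
              have hknk := hknc k hkc2.1
              rw [PySem.Dict.getD_insert, if_neg hknk, hgde k hkc2.2, hgne k hknk]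
              exact hcnB k hkc2.1
            · subst hk'
              rw [PySem.Dict.getD_insert, if_pos rfl]
          · intro k hk
            rcases (PySem.Set.mem_add (PySem.Set.discard sa.cache w) key k).mp hk with hk' | hk'
            · have hkc2 := (PySem.Set.mem_discard _ _ _).mp hk'
              rw [hlone k (hknc k hkc2.1)]
              exact hseen k hkc2.1
            · subst hk'
              rw [hloself]
              rfl
          · intro k
            rw [PySem.Dict.get?_insert]
            by_cases hkk : k = key
            · rw [if_pos hkk, hkk, hloself]
            · rw [if_neg hkk, hlone k hkk]
              exact hlp k
          · -- sentN
            intro e he hs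
            rcases List.mem_append.mp he with he1 | he2
            · rcases List.mem_append.mp he1 with hH | hnew
              · have heh : e ∈ sa.heap := hsubl.subset hH
                have hne := hkeyNotSent e heh hs
                rw [hgne _ hne]
                exact hsentN e heh hs
              · rcases List.mem_cons.mp hnew with he' | he'
                · subst he'
                  simp only at hs ⊢
                  omega
                · cases he'
            · rcases List.mem_cons.mp he2 with he' | he'
              · subst he'
                simp only at hs ⊢
                omega
              · cases he'
          · intro k hk
            rcases (PySem.Set.mem_add (PySem.Set.discard sa.cache w) key k).mp hk with hk' | hk'
            · have hkc2 := (PySem.Set.mem_discard _ _ _).mp hk'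
              obtain ⟨t, ht⟩ := hheapValid k hkc2.1
              refine ⟨t, ?_⟩
              have hin : (-pvNextGE requests i k, t, k) ∈ H' :=
                hkeep _ ht hkc2.1 hkc2.2 (by simp)
              rw [hgne k (hknc k hkc2.1)]
              exact List.mem_append.mpr (Or.inl (List.mem_append.mpr (Or.inl hin)))
            · subst hk'
              exact ⟨sa.tie, List.mem_append.mpr (Or.inl (List.mem_append.mpr
                (Or.inr List.mem_cons_self)))⟩
          · -- sent
            rw [List.filter_append, List.filter_append, hnewfilter, hnewfilter]
            have hHtrans := List.Pairwise.sublist hHfilter htrans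
            have hHkey : ∀ a ∈ H'.filter (fun e => -e.1 == pvSENT), a.2.2 ≠ key :=
              fun a ha => hfkey a (hHfilter.subset ha)
            by_cases hvs : pvNextGE requests (i + 1) key = pvSENT
            · rw [if_pos hvs, if_pos hvs, List.append_assoc, List.pairwise_append]
              refine ⟨hHtrans, ?_, ?_⟩
              · refine List.pairwise_cons.mpr ⟨?_, List.pairwise_singleton _ _⟩
                intro b hb
                rcases List.mem_cons.mp hb with hb | hb
                · subst hb
                  exact ⟨by simp, Or.inl rfl⟩
                · cases hb
              · intro a ha b hb
                have hbk : b.2.2 = key := by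
                  rcases List.mem_cons.mp hb with hb | hb
                  · subst hb; rfl
                  · rcases List.mem_cons.mp hb with hb | hb
                    · subst hb; rfl
                    · cases hb
                have hbt : sa.tie ≤ b.2.1 := by
                  rcases List.mem_cons.mp hb with hb | hb
                  · subst hb; simp
                  · rcases List.mem_cons.mp hb with hb | hb
                    · subst hb; simp
                    · cases hb
                refine ⟨by have := htie a (hsubl.subset (List.mem_of_mem_filter ha)); omega,
                  Or.inr ?_⟩
                rw [hbk, hlodne _ (hHkey a ha), hlodself]
                exact pvLastOccD_lt hi
            · rw [if_neg hvs, if_neg hvs, List.append_nil, List.append_nil]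
              exact hHtrans
          · -- tie
            intro e he
            rcases List.mem_append.mp he with he1 | he2
            · rcases List.mem_append.mp he1 with hH | hnew
              · have := htie e (hsubl.subset hH)
                simp only
                omega
              · rcases List.mem_cons.mp hnew with he' | he'
                · subst he'; simp only; omega
                · cases he'
            · rcases List.mem_cons.mp he2 with he' | he'
              · subst he'; simp only; omega
              · cases he'
          · intro k
            by_cases hkk : k = key
            · subst hkk
              rw [PySem.Dict.getD_insert, if_pos rfl]
              exact hptrA'
            · rw [PySem.Dict.getD_insert, if_neg hkk]
              exact hptrmono k _ (hptrA k)
          · intro k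
            by_cases hkk : k = key
            · subst hkk
              rw [PySem.Dict.getD_insert, if_pos rfl]
              exact hptrB'
            · rw [PySem.Dict.getD_insert, if_neg hkk]
              exact hptrmono k _ (hptrB k)
      · -- no eviction
        have hB0 : ¬ (cs ≤ (sb.nu.size : Int) ∧ sb.nu.size ≠ 0) := by
          intro ⟨hsz, _⟩
          apply htrig
          unfold PySem.Set.len
          omega
        rw [if_neg htrig, if_neg hB0]
        refine ⟨PySem.Set.nodup_add _ _ nodupC,
          PySem.Dict.nodup_keys_insert _ _ _ nodupK, hhits, ?_, ?_, ?_, ?_, ?_, ?_, ?_, ?_, ?_, ?_, ?_⟩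
        · intro k
          rw [PySem.Dict.contains_insert, PySem.Set.mem_add]
          by_cases hkk : k = key
          · simp [hkk]
          · simp only [beq_eq_false_iff_ne.mpr hkk, Bool.false_or]
            rw [← hmemx k]
            simp [hkk]
        · intro k hk
          rcases (PySem.Set.mem_add sa.cache key k).mp hk with hk' | hk'
          · have hknk := hknc k hk'
            unfold pvCurrNext at hcnA ⊢
            rw [PySem.Dict.getD_insert, if_neg hknk, hgne k hknk]
            exact hcnA k hk'
          · subst hk'
            unfold pvCurrNext
            rw [hpos, PySem.Dict.getD_insert, if_pos rfl, if_neg hAcond, hvA2]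
        · intro k hk
          rcases (PySem.Set.mem_add sa.cache key k).mp hk with hk' | hk'
          · have hknk := hknc k hk'
            rw [PySem.Dict.getD_insert, if_neg hknk, hgne k hknk]
            exact hcnB k hk'
          · subst hk'
            rw [PySem.Dict.getD_insert, if_pos rfl]
        · intro k hk
          rcases (PySem.Set.mem_add sa.cache key k).mp hk with hk' | hk'
          · rw [hlone k (hknc k hk')]
            exact hseen k hk'
          · subst hk'
            rw [hloself]
            rfl
        · intro k
          rw [PySem.Dict.get?_insert]
          by_cases hkk : k = key
          · rw [if_pos hkk, hkk, hloself]
          · rw [if_neg hkk, hlone k hkk]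
            exact hlp k
        · -- sentN
          intro e he hs
          rcases List.mem_append.mp he with he1 | he2
          · rcases List.mem_append.mp he1 with hH | hnew
            · have hne := hkeyNotSent e hH hs
              rw [hgne _ hne]
              exact hsentN e hH hs
            · rcases List.mem_cons.mp hnew with he' | he'
              · subst he'
                simp only at hs ⊢
                omega
              · cases he'
          · rcases List.mem_cons.mp he2 with he' | he'
            · subst he'
              simp only at hs ⊢
              omega
            · cases he'
        · intro k hk
          rcases (PySem.Set.mem_add sa.cache key k).mp hk with hk' | hk'
          · obtain ⟨t, ht⟩ := hheapValid k hk'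
            refine ⟨t, ?_⟩
            rw [hgne k (hknc k hk')]
            exact List.mem_append.mpr (Or.inl (List.mem_append.mpr (Or.inl ht)))
          · subst hk'
            exact ⟨sa.tie, List.mem_append.mpr (Or.inl (List.mem_append.mpr
              (Or.inr List.mem_cons_self)))⟩
        · -- sent
          rw [List.filter_append, List.filter_append, hnewfilter, hnewfilter]
          by_cases hvs : pvNextGE requests (i + 1) key = pvSENT
          · rw [if_pos hvs, if_pos hvs, List.append_assoc, List.pairwise_append]
            refine ⟨htrans, ?_, ?_⟩
            · refine List.pairwise_cons.mpr ⟨?_, List.pairwise_singleton _ _⟩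
              intro b hb
              rcases List.mem_cons.mp hb with hb | hb
              · subst hb
                exact ⟨by simp, Or.inl rfl⟩
              · cases hb
            · intro a ha b hb
              have hbk : b.2.2 = key := by
                rcases List.mem_cons.mp hb with hb | hb
                · subst hb; rfl
                · rcases List.mem_cons.mp hb with hb | hb
                  · subst hb; rfl
                  · cases hb
              have hbt : sa.tie ≤ b.2.1 := by
                rcases List.mem_cons.mp hb with hb | hb
                · subst hb; simp
                · rcases List.mem_cons.mp hb with hb | hb
                  · subst hb; simp
                  · cases hb
              refine ⟨by have := htie a (List.mem_of_mem_filter ha); omega, Or.inr ?_⟩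
              rw [hbk, hlodne _ (hfkey a ha), hlodself]
              exact pvLastOccD_lt hi
          · rw [if_neg hvs, if_neg hvs, List.append_nil, List.append_nil]
            exact htrans
        · intro e he
          rcases List.mem_append.mp he with he1 | he2
          · rcases List.mem_append.mp he1 with hH | hnew
            · have := htie e hH
              simp only
              omega
            · rcases List.mem_cons.mp hnew with he' | he'
              · subst he'; simp only; omega
              · cases he'
          · rcases List.mem_cons.mp he2 with he' | he'
            · subst he'; simp only; omega
            · cases he'
        · intro k
          by_cases hkk : k = key
          · subst hkk
            rw [PySem.Dict.getD_insert, if_pos rfl]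
            exact hptrA'
          · rw [PySem.Dict.getD_insert, if_neg hkk]
            exact hptrmono k _ (hptrA k)
        · intro k
          by_cases hkk : k = key
          · subst hkk
            rw [PySem.Dict.getD_insert, if_pos rfl]
            exact hptrB'
          · rw [PySem.Dict.getD_insert, if_neg hkk]
            exact hptrmono k _ (hptrB k)
    · -- CONTINUE: the key is never requested again
      have hAcond : ((pvOcc requests key).length : Int) ≤ pvAdvance (pvOcc requests key) i (sa.ni.getD key 0) :=
        hiffA.mpr hnf
      have hBcond : ¬ pvAdvance (pvOcc requests key) i (sb.ptr.getD key 0) < ((pvOcc requests key).length : Int) := by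
        have := hiffB.mpr hnf
        omega
      rw [if_pos hAcond, if_neg hBcond]
      have hknc : ∀ k ∈ sa.cache, k ≠ key := fun k hk hkk => hkc (hkk ▸ hk)
      refine ⟨nodupC, nodupK, hhits, hmemx, ?_, ?_, ?_, ?_,
        (fun e he hs => by rw [hgne _ (hkeyNotSent e he hs)]; exact hsentN e he hs),
        ?_, ?_, htie, ?_, ?_⟩
      · intro k hk
        rw [hgne k (hknc k hk)]
        exact hcnA k hk
      · intro k hk
        rw [hgne k (hknc k hk)]
        exact hcnB k hk
      · intro k hk
        rw [hlone k (hknc k hk)]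
        exact hseen k hk
      · intro k
        rw [PySem.Dict.get?_insert]
        by_cases hkk : k = key
        · rw [if_pos hkk, hkk, hloself]
        · rw [if_neg hkk, hlone k hkk]
          exact hlp k
      · intro k hk
        obtain ⟨t, ht⟩ := hheapValid k hk
        refine ⟨t, ?_⟩
        rw [hgne k (hknc k hk)]
        exact ht
      · exact htrans
      · intro k
        exact hptrmono k _ (hptrA k)
      · intro k
        by_cases hkk : k = key
        · subst hkk
          rw [PySem.Dict.getD_insert, if_pos rfl]
          exact hptrB'
        · rw [PySem.Dict.getD_insert, if_neg hkk]
          exact hptrmono k _ (hptrB k)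

theorem pvSet_length_add_not_mem {s : PySem.Set Int} {x : Int} (h : x ∉ s) :
    (PySem.Set.add s x).length = s.length + 1 := by
  have hc : s.contains x = false := by
    cases hcc : s.contains x
    · rfl
    · exact absurd ((PySem.Set.contains_iff _ _).mp hcc) h
  show (if s.contains x = true then s else s ++ [x]).length = s.length + 1
  rw [hc]
  simp

theorem pvStrongToWeak {requests : List Int} {i : Int} {sa : PvStA} {sb : PvStB}
    (h : PvInvS requests i sa sb) : PvInvW requests i sa sb := by
  obtain ⟨nodupC, nodupK, hhits, hmemx, hcnA, hcnB, hseen, hlp, hsentN, hheapValid,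
    hsent, htie, hptrA, hptrB⟩ := h
  refine ⟨nodupC, nodupK, hhits, ?_, fun k _ => hmemx k, hcnA, ?_, hheapValid, hptrA, hptrB⟩
  · have hperm : sa.cache.Perm sb.nu.keys :=
      (List.perm_ext_iff_of_nodup nodupC nodupK).mpr
        (fun x => by rw [hmemx x, PySem.Dict.contains_iff_mem_keys])
    rw [hperm.length_eq]
    exact pvDict_keys_length sb.nu
  · intro k hk
    exact hcnB k ((hmemx k).mpr ((PySem.Dict.contains_iff_mem_keys _ _).mpr hk))

-- ---------- the WEAK step (after time 10^9+1) ----------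

theorem pvStep_invW {cs : Int} {requests : List Int} {i : Int} {sa : PvStA} {sb : PvStB}
    (hsle : pvSENT ≤ i) (hi : 0 ≤ i) (hin : i < (requests.length : Int))
    (hinv : PvInvW requests i sa sb) :
    PvInvW requests (i + 1) (pvStepA (pvPositions requests) cs requests sa i)
                            (pvStepB (pvPositions requests) cs requests sb i) := by
  obtain ⟨nodupC, nodupK, hhits, hsize, hliveA, hcnA, hcnB, hheapValid, hptrA, hptrB⟩ := hinv
  simp only [pvStepA, pvStepB, pvTailA]
  generalize hkeyg : PySem.List.pyGetD requests i 0 = key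
  have hpos : (pvPositions requests).getD key [] = pvOcc requests key :=
    pvPositions_getD requests key
  have hgne : ∀ k : Int, k ≠ key → pvNextGE requests (i + 1) k = pvNextGE requests i k := by
    intro k hk
    exact pvNextGE_succ_ne (fun h => hk (by rw [← hkeyg, h]))
  have hptrmono : ∀ (k p : Int), pvPtrOk requests i k p → pvPtrOk requests (i + 1) k p := by
    intro k p ⟨a, b, c⟩
    exact ⟨a, b, fun j hj => by have := c j hj; omega⟩
  have hkeylive : pvLive requests i key := pvLive_self hi hin hkeyg
  -- after time 10^9+1 a key whose numeric next use is the sentinel and that is not the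
  -- currently requested key is never requested again
  have hdeadSent : ∀ k : Int, k ≠ key → pvNextGE requests i k = pvSENT → ¬ pvLive requests i k := by
    intro k hkk hg hlk
    obtain ⟨hm, his⟩ := pvLive_sent_key hg hlk
    have hmem := pvOcc_mem.mp hm
    have hieq : i = pvSENT := by omega
    have hkey2 : key = k := by
      rw [← hkeyg, hieq]
      exact hmem.2.2
    exact hkk hkey2.symm
  have hLB : ∀ k : Int, ((pvNext? requests i k).isSome = true) ↔ pvLive requests i k := by
    intro k
    rw [pvLive_iff, Option.isSome_iff_ne_none]
  have hLBf : ∀ k : Int, ((pvNext? requests i k).isSome = false) ↔ ¬ pvLive requests i k := by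
    intro k
    rw [← hLB k]
    cases h : (pvNext? requests i k).isSome <;> simp [h]
  obtain ⟨hptrA', hiffA, hvalA⟩ := pvAdvance_g (k := key) hi (hptrA key)
  obtain ⟨hptrB', hiffB, hvalB⟩ := pvAdvance_g (k := key) hi (hptrB key)
  rw [hpos]
  by_cases hkc : key ∈ sa.cache
  · -- HIT
    have h1 : PySem.Set.contains sa.cache key = true := (PySem.Set.contains_iff _ _).mpr hkc
    have h2 : sb.nu.contains key = true := (hliveA key hkeylive).mp hkc
    rw [if_pos h1, if_pos h2]
    have hvB : (if pvAdvance (pvOcc requests key) i (sb.ptr.getD key 0) < ((pvOcc requests key).length : Int)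
        then PySem.List.pyGetD (pvOcc requests key) (pvAdvance (pvOcc requests key) i (sb.ptr.getD key 0)) 0
        else pvSENT) = pvNextGE requests (i + 1) key := by
      by_cases hq : pvAdvance (pvOcc requests key) i (sb.ptr.getD key 0) < ((pvOcc requests key).length : Int)
      · rw [if_pos hq]
        rw [if_neg (by omega)] at hvalB
        exact hvalB
      · rw [if_neg hq]
        rw [if_pos (by omega)] at hvalB
        exact hvalB
    simp only [hvalA, hvB]
    refine ⟨nodupC, PySem.Dict.nodup_keys_insert _ _ _ nodupK, by simp [hhits], ?_, ?_, ?_, ?_, ?_, ?_, ?_⟩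
    · rw [PySem.Dict.size_insert, if_pos h2]
      exact hsize
    · intro k hlk
      rw [PySem.Dict.contains_insert]
      by_cases hkk : k = key
      · subst hkk
        simp [hkc]
      · simp only [beq_eq_false_iff_ne.mpr hkk, Bool.false_or]
        exact hliveA k (pvLive_mono hlk)
    · intro k hk
      by_cases hkk : k = key
      · subst hkk
        unfold pvCurrNext
        rw [hpos, PySem.Dict.getD_insert, if_pos rfl]
        exact hvalA
      · unfold pvCurrNext at hcnA ⊢
        rw [PySem.Dict.getD_insert, if_neg hkk, hgne k hkk]
        exact hcnA k hk
    · intro k hk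
      by_cases hkk : k = key
      · subst hkk
        rw [PySem.Dict.getD_insert, if_pos rfl]
      · rw [PySem.Dict.getD_insert, if_neg hkk, hgne k hkk]
        rcases (PySem.Dict.mem_keys_insert _ _ _ _).mp hk with hk' | hk'
        · exact absurd hk' hkk
        · exact hcnB k hk'
    · intro k hk
      by_cases hkk : k = key
      · subst hkk
        exact ⟨sa.tie, List.mem_append.mpr (Or.inr List.mem_cons_self)⟩
      · obtain ⟨t, ht⟩ := hheapValid k hk
        refine ⟨t, List.mem_append.mpr (Or.inl ?_)⟩
        rw [hgne k hkk]
        exact ht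
    · intro k
      by_cases hkk : k = key
      · subst hkk
        rw [PySem.Dict.getD_insert, if_pos rfl]
        exact hptrA'
      · rw [PySem.Dict.getD_insert, if_neg hkk]
        exact hptrmono k _ (hptrA k)
    · intro k
      by_cases hkk : k = key
      · subst hkk
        rw [PySem.Dict.getD_insert, if_pos rfl]
        exact hptrB'
      · rw [PySem.Dict.getD_insert, if_neg hkk]
        exact hptrmono k _ (hptrB k)
  · -- MISS
    have h1 : PySem.Set.contains sa.cache key = false := by
      cases hcc : PySem.Set.contains sa.cache key
      · rfl
      · exact absurd ((PySem.Set.contains_iff _ _).mp hcc) hkc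
    have h2 : sb.nu.contains key = false := by
      cases hcc : sb.nu.contains key
      · rfl
      · exact absurd ((hliveA key hkeylive).mpr hcc) hkc
    have hkeynk : key ∉ sb.nu.keys := by
      intro hk
      rw [← PySem.Dict.contains_iff_mem_keys, h2] at hk
      cases hk
    rw [if_neg (show ¬ (PySem.Set.contains sa.cache key = true) by
          rw [h1]; exact fun h => Bool.false_ne_true h),
        if_neg (show ¬ (sb.nu.contains key = true) by
          rw [h2]; exact fun h => Bool.false_ne_true h)]
    have hknc : ∀ k ∈ sa.cache, k ≠ key := fun k hk hkk => hkc (hkk ▸ hk)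
    have hknk : ∀ k ∈ sb.nu.keys, k ≠ key := fun k hk hkk => hkeynk (hkk ▸ hk)
    by_cases hnf : pvLive requests (i + 1) key
    · -- INSERT
      have hAcond : ¬ ((pvOcc requests key).length : Int) ≤ pvAdvance (pvOcc requests key) i (sa.ni.getD key 0) := by
        intro hcon
        exact (hiffA.mp hcon) hnf
      have hBq : pvAdvance (pvOcc requests key) i (sb.ptr.getD key 0) < ((pvOcc requests key).length : Int) := by
        by_contra hcon
        exact (hiffB.mp (by omega)) hnf
      rw [if_neg hAcond, if_pos hBq]
      have hvge : i + 1 ≤ pvNextGE requests (i + 1) key := by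
        rcases pvNextGE_spec requests (i + 1) key with hs | ⟨_, hge, _⟩
        · exact absurd (pvLive_iff.mp hnf) (by rw [hs]; simp)
        · exact hge
      have hgdii : (sa.ni.insert key (pvAdvance (pvOcc requests key) i (sa.ni.getD key 0))).getD key 0
          = pvAdvance (pvOcc requests key) i (sa.ni.getD key 0) := by
        rw [PySem.Dict.getD_insert, if_pos rfl]
      rw [hgdii]
      have hvA2 : PySem.List.pyGetD (pvOcc requests key) (pvAdvance (pvOcc requests key) i (sa.ni.getD key 0)) 0
          = pvNextGE requests (i + 1) key := by
        rw [if_neg hAcond] at hvalA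
        exact hvalA
      have hvB2 : PySem.List.pyGetD (pvOcc requests key) (pvAdvance (pvOcc requests key) i (sb.ptr.getD key 0)) 0
          = pvNextGE requests (i + 1) key := by
        rw [if_neg (by omega)] at hvalB
        exact hvalB
      have hfix : pvAdvance (pvOcc requests key) i (pvAdvance (pvOcc requests key) i (sa.ni.getD key 0))
          = pvAdvance (pvOcc requests key) i (sa.ni.getD key 0) := by
        rw [pvAdvance, dif_neg]
        intro ⟨hl, hle⟩
        rw [hvA2] at hle
        omega
      rw [hfix, PySem.Dict.insert_insert_self, hvalA, hvA2, hvB2]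
      by_cases htrig : cs ≤ PySem.Set.len sa.cache
      · by_cases hcnil : sa.cache = []
        · -- empty cache: A drains the heap, B has nothing to evict
          have hB0 : ¬ (cs ≤ (sb.nu.size : Int) ∧ sb.nu.size ≠ 0) := by
            intro ⟨_, hsz⟩
            apply hsz
            rw [← hsize, hcnil]
            rfl
          rw [if_pos htrig, if_neg hB0, hcnil, pvEvictLoop_nil]
          simp only [List.nil_append, List.singleton_append]
          refine ⟨?_, PySem.Dict.nodup_keys_insert _ _ _ nodupK, hhits, ?_, ?_, ?_, ?_, ?_, ?_, ?_⟩
          · exact PySem.Set.nodup_add [] key List.nodup_nil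
          · rw [PySem.Dict.size_insert, if_neg (by rw [h2]; exact fun h => Bool.false_ne_true h)]
            rw [pvSet_length_add_not_mem (by simp), ← hsize, hcnil]
          · intro k hlk
            rw [PySem.Dict.contains_insert, PySem.Set.mem_add]
            by_cases hkk : k = key
            · simp [hkk]
            · simp only [beq_eq_false_iff_ne.mpr hkk, Bool.false_or]
              rw [← hliveA k (pvLive_mono hlk)]
              simp [hkk, hcnil]
          · intro k hk
            rcases (PySem.Set.mem_add [] key k).mp hk with hk' | hk'
            · cases hk'
            · subst hk'
              unfold pvCurrNext
              rw [hpos, PySem.Dict.getD_insert, if_pos rfl, if_neg hAcond, hvA2]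
          · intro k hk
            by_cases hkk : k = key
            · subst hkk
              rw [PySem.Dict.getD_insert, if_pos rfl]
            · rw [PySem.Dict.getD_insert, if_neg hkk, hgne k hkk]
              rcases (PySem.Dict.mem_keys_insert _ _ _ _).mp hk with hk' | hk'
              · exact absurd hk' hkk
              · exact hcnB k hk'
          · intro k hk
            rcases (PySem.Set.mem_add [] key k).mp hk with hk' | hk'
            · cases hk'
            · subst hk'
              exact ⟨sa.tie, by simp⟩
          · intro k
            by_cases hkk : k = key
            · subst hkk
              rw [PySem.Dict.getD_insert, if_pos rfl]
              exact hptrA'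
            · rw [PySem.Dict.getD_insert, if_neg hkk]
              exact hptrmono k _ (hptrA k)
          · intro k
            by_cases hkk : k = key
            · subst hkk
              rw [PySem.Dict.getD_insert, if_pos rfl]
              exact hptrB'
            · rw [PySem.Dict.getD_insert, if_neg hkk]
              exact hptrmono k _ (hptrB k)
        · -- eviction on both sides
          obtain ⟨w, H', heq, hwc, hwmax, hkeep⟩ :=
            pvEvictLoop_weak requests i sa.ni sa.heap sa.cache hcnil hcnA hheapValid
          have hB1 : cs ≤ (sb.nu.size : Int) ∧ sb.nu.size ≠ 0 := by
            constructor
            · rw [← hsize]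
              simpa [PySem.Set.len] using htrig
            · rw [← hsize]
              intro h0
              exact hcnil (List.length_eq_zero_iff.mp h0)
          have hitems : sb.nu.items ≠ [] := by
            intro h0
            apply hB1.2
            simp [PySem.Dict.size, h0]
          obtain ⟨hvmem, hvmax⟩ := pvVictim_spec sb.nu sb.lp nodupK hitems
          set v := pvVictim sb.nu sb.lp with hvdef
          -- every key in B's dict has numeric next use at most that of A's victim
          have hNle : ∀ k ∈ sb.nu.keys, pvNextGE requests i k ≤ pvNextGE requests i w := by
            intro k hk
            by_cases hlk : pvLive requests i k
            · exact hwmax k ((hliveA k hlk).mpr ((PySem.Dict.contains_iff_mem_keys _ _).mpr hk))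
            · rw [pvDead_nextGE hlk]
              have hdead : ∃ d ∈ sa.cache, ¬ pvLive requests i d := by
                obtain ⟨d, hd, hnd⟩ := pvDead_transfer
                  (p := fun k => (pvNext? requests i k).isSome) nodupK nodupC
                  (fun k' hk' =>
                    ((hliveA k' ((hLB k').mp hk')).trans
                      (PySem.Dict.contains_iff_mem_keys _ _)).symm)
                  (by rw [hsize]; exact pvDict_keys_length sb.nu) hk ((hLBf k).mpr hlk)
                exact ⟨d, hd, (hLBf d).mp hnd⟩
              obtain ⟨d, hd, hld⟩ := hdead
              have := hwmax d hd
              rw [pvDead_nextGE hld] at this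
              exact this
          -- B's victim either equals A's or both victims are never requested again
          have hvw : v = w ∨ (¬ pvLive requests i w ∧ ¬ pvLive requests i v) := by
            have hNv : sb.nu.getD v 0 = pvNextGE requests i v := hcnB v hvmem
            by_cases hlw : pvLive requests i w
            · left
              have hwkeys : w ∈ sb.nu.keys :=
                (PySem.Dict.contains_iff_mem_keys _ _).mp ((hliveA w hlw).mp hwc)
              have hNw : sb.nu.getD w 0 = pvNextGE requests i w := hcnB w hwkeys
              have hvge' : pvNextGE requests i w ≤ pvNextGE requests i v := by
                have := hvmax w hwkeys
                simp only [pvPairLt, decide_eq_false_iff_not] at this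
                rw [hNv, hNw] at this
                omega
              have hwne : pvNextGE requests i w ≠ pvSENT := by
                intro hs
                exact hdeadSent w (hknc w hwc) hs hlw
              by_cases hlv : pvLive requests i v
              · have hvcache : v ∈ sa.cache :=
                  (hliveA v hlv).mpr ((PySem.Dict.contains_iff_mem_keys _ _).mpr hvmem)
                have hvle : pvNextGE requests i v ≤ pvNextGE requests i w := hwmax v hvcache
                have heqn : pvNextGE requests i v = pvNextGE requests i w := by omega
                have hvne : pvNextGE requests i v ≠ pvSENT := by omega
                exact pvOcc_inj (pvNextGE_mem_of_ne hvne).1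
                  (heqn ▸ (pvNextGE_mem_of_ne hwne).1)
              · exfalso
                have hvs : pvNextGE requests i v = pvSENT := pvDead_nextGE hlv
                have := hNle v hvmem
                omega
            · right
              refine ⟨hlw, ?_⟩
              intro hlv
              have hvcache : v ∈ sa.cache :=
                (hliveA v hlv).mpr ((PySem.Dict.contains_iff_mem_keys _ _).mpr hvmem)
              have hws : pvNextGE requests i w = pvSENT := pvDead_nextGE hlw
              have hdead : ∃ d ∈ sb.nu.keys, ¬ pvLive requests i d := by
                obtain ⟨d, hd, hnd⟩ := pvDead_transfer
                  (p := fun k => (pvNext? requests i k).isSome) nodupC nodupK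
                  (fun k' hk' =>
                    (hliveA k' ((hLB k').mp hk')).trans
                      (PySem.Dict.contains_iff_mem_keys _ _))
                  (by rw [hsize]; exact (pvDict_keys_length sb.nu).symm) hwc ((hLBf w).mpr hlw)
                exact ⟨d, hd, (hLBf d).mp hnd⟩
              obtain ⟨d, hd, hld⟩ := hdead
              have hNd : sb.nu.getD d 0 = pvNextGE requests i d := hcnB d hd
              have hds : pvNextGE requests i d = pvSENT := pvDead_nextGE hld
              have hmax := hvmax d hd
              simp only [pvPairLt, decide_eq_false_iff_not] at hmax
              rw [hNv, hNd, hds] at hmax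
              have hvS : pvNextGE requests i v = pvSENT := by
                have := hNle v hvmem
                omega
              exact hdeadSent v (hknk v hvmem) hvS hlv
          rw [if_pos htrig, heq, if_pos hB1]
          have hvkeys := hvmem
          have hkeyd : key ∉ PySem.Set.discard sa.cache w := by
            intro hk
            exact hkc ((PySem.Set.mem_discard _ _ _).mp hk).1
          have hgde : ∀ k : Int, k ≠ v → (sb.nu.erase v).getD k 0 = sb.nu.getD k 0 := by
            intro k hkw
            rw [PySem.Dict.getD_eq_get?_getD, PySem.Dict.getD_eq_get?_getD, pvDict_get?_erase,
              if_neg hkw]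
          refine ⟨PySem.Set.nodup_add _ _ (PySem.Set.nodup_discard _ _ nodupC),
            PySem.Dict.nodup_keys_insert _ _ _ (pvDict_nodup_keys_erase _ _ nodupK),
            hhits, ?_, ?_, ?_, ?_, ?_, ?_, ?_⟩
          · -- sizes
            rw [pvSet_length_add_not_mem hkeyd, PySem.Dict.size_insert,
              if_neg (by rw [pvDict_contains_erase, h2]; simp)]
            have hd1 := pvSet_length_discard hwc nodupC
            have hd2 := pvDict_size_erase sb.nu v hvkeys nodupK
            omega
          · -- live agreement
            intro k hlk
            rw [PySem.Dict.contains_insert, PySem.Set.mem_add, PySem.Set.mem_discard,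
              pvDict_contains_erase]
            by_cases hkk : k = key
            · simp [hkk]
            · simp only [beq_eq_false_iff_ne.mpr hkk, Bool.false_or]
              have hlk0 : pvLive requests i k := pvLive_mono hlk
              rcases hvw with hvw | ⟨hdw, hdv⟩
              · subst hvw
                rw [Bool.and_eq_true, decide_eq_true_eq, ← hliveA k hlk0]
                constructor
                · rintro (⟨ha', hb'⟩ | ha')
                  · exact ⟨hb', ha'⟩
                  · exact absurd ha' hkk
                · rintro ⟨ha', hb'⟩
                  exact Or.inl ⟨hb', ha'⟩
              · have hkw : k ≠ w := fun h => hdw (h ▸ hlk0)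
                have hkv : k ≠ v := fun h => hdv (h ▸ hlk0)
                rw [Bool.and_eq_true, decide_eq_true_eq, ← hliveA k hlk0]
                constructor
                · rintro (⟨ha', _⟩ | ha')
                  · exact ⟨hkv, ha'⟩
                  · exact absurd ha' hkk
                · rintro ⟨_, hb'⟩
                  exact Or.inl ⟨hb', hkw⟩
          · intro k hk
            rcases (PySem.Set.mem_add (PySem.Set.discard sa.cache w) key k).mp hk with hk' | hk'
            · have hkc2 := (PySem.Set.mem_discard _ _ _).mp hk'
              have hknk' := hknc k hkc2.1
              unfold pvCurrNext at hcnA ⊢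
              rw [PySem.Dict.getD_insert, if_neg hknk', hgne k hknk']
              exact hcnA k hkc2.1
            · subst hk'
              unfold pvCurrNext
              rw [hpos, PySem.Dict.getD_insert, if_pos rfl, if_neg hAcond, hvA2]
          · intro k hk
            by_cases hkk : k = key
            · subst hkk
              rw [PySem.Dict.getD_insert, if_pos rfl]
            · rcases (PySem.Dict.mem_keys_insert _ _ _ _).mp hk with hk' | hk'
              · exact absurd hk' hkk
              · have hkcontains : (sb.nu.erase v).contains k = true :=
                  (PySem.Dict.contains_iff_mem_keys _ _).mpr hk'
                rw [pvDict_contains_erase, Bool.and_eq_true, decide_eq_true_eq] at hkcontains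
                obtain ⟨hkv, hkcont⟩ := hkcontains
                rw [PySem.Dict.getD_insert, if_neg hkk, hgde k hkv, hgne k hkk]
                exact hcnB k ((PySem.Dict.contains_iff_mem_keys _ _).mp hkcont)
          · intro k hk
            rcases (PySem.Set.mem_add (PySem.Set.discard sa.cache w) key k).mp hk with hk' | hk'
            · have hkc2 := (PySem.Set.mem_discard _ _ _).mp hk'
              obtain ⟨t, ht⟩ := hheapValid k hkc2.1
              refine ⟨t, ?_⟩
              have hin : (-pvNextGE requests i k, t, k) ∈ H' :=
                hkeep _ ht hkc2.1 hkc2.2 (by simp)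
              rw [hgne k (hknc k hkc2.1)]
              exact List.mem_append.mpr (Or.inl (List.mem_append.mpr (Or.inl hin)))
            · subst hk'
              exact ⟨sa.tie, List.mem_append.mpr (Or.inl (List.mem_append.mpr
                (Or.inr List.mem_cons_self)))⟩
          · intro k
            by_cases hkk : k = key
            · subst hkk
              rw [PySem.Dict.getD_insert, if_pos rfl]
              exact hptrA'
            · rw [PySem.Dict.getD_insert, if_neg hkk]
              exact hptrmono k _ (hptrA k)
          · intro k
            by_cases hkk : k = key
            · subst hkk
              rw [PySem.Dict.getD_insert, if_pos rfl]
              exact hptrB'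
            · rw [PySem.Dict.getD_insert, if_neg hkk]
              exact hptrmono k _ (hptrB k)
      · -- no eviction
        have hB0 : ¬ (cs ≤ (sb.nu.size : Int) ∧ sb.nu.size ≠ 0) := by
          intro ⟨hsz, _⟩
          apply htrig
          unfold PySem.Set.len
          omega
        rw [if_neg htrig, if_neg hB0]
        refine ⟨PySem.Set.nodup_add _ _ nodupC,
          PySem.Dict.nodup_keys_insert _ _ _ nodupK, hhits, ?_, ?_, ?_, ?_, ?_, ?_, ?_⟩
        · rw [pvSet_length_add_not_mem hkc, PySem.Dict.size_insert,
            if_neg (by rw [h2]; exact fun h => Bool.false_ne_true h)]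
          omega
        · intro k hlk
          rw [PySem.Dict.contains_insert, PySem.Set.mem_add]
          by_cases hkk : k = key
          · simp [hkk]
          · simp only [beq_eq_false_iff_ne.mpr hkk, Bool.false_or]
            rw [← hliveA k (pvLive_mono hlk)]
            simp [hkk]
        · intro k hk
          rcases (PySem.Set.mem_add sa.cache key k).mp hk with hk' | hk'
          · have hknk' := hknc k hk'
            unfold pvCurrNext at hcnA ⊢
            rw [PySem.Dict.getD_insert, if_neg hknk', hgne k hknk']
            exact hcnA k hk'
          · subst hk'
            unfold pvCurrNext
            rw [hpos, PySem.Dict.getD_insert, if_pos rfl, if_neg hAcond, hvA2]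
        · intro k hk
          by_cases hkk : k = key
          · subst hkk
            rw [PySem.Dict.getD_insert, if_pos rfl]
          · rcases (PySem.Dict.mem_keys_insert _ _ _ _).mp hk with hk' | hk'
            · exact absurd hk' hkk
            · rw [PySem.Dict.getD_insert, if_neg hkk, hgne k hkk]
              exact hcnB k hk'
        · intro k hk
          rcases (PySem.Set.mem_add sa.cache key k).mp hk with hk' | hk'
          · obtain ⟨t, ht⟩ := hheapValid k hk'
            refine ⟨t, ?_⟩
            rw [hgne k (hknc k hk')]
            exact List.mem_append.mpr (Or.inl (List.mem_append.mpr (Or.inl ht)))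
          · subst hk'
            exact ⟨sa.tie, List.mem_append.mpr (Or.inl (List.mem_append.mpr
              (Or.inr List.mem_cons_self)))⟩
        · intro k
          by_cases hkk : k = key
          · subst hkk
            rw [PySem.Dict.getD_insert, if_pos rfl]
            exact hptrA'
          · rw [PySem.Dict.getD_insert, if_neg hkk]
            exact hptrmono k _ (hptrA k)
        · intro k
          by_cases hkk : k = key
          · subst hkk
            rw [PySem.Dict.getD_insert, if_pos rfl]
            exact hptrB'
          · rw [PySem.Dict.getD_insert, if_neg hkk]
            exact hptrmono k _ (hptrB k)
    · -- CONTINUE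
      have hAcond : ((pvOcc requests key).length : Int) ≤ pvAdvance (pvOcc requests key) i (sa.ni.getD key 0) :=
        hiffA.mpr hnf
      have hBcond : ¬ pvAdvance (pvOcc requests key) i (sb.ptr.getD key 0) < ((pvOcc requests key).length : Int) := by
        have := hiffB.mpr hnf
        omega
      rw [if_pos hAcond, if_neg hBcond]
      refine ⟨nodupC, nodupK, hhits, hsize, ?_, ?_, ?_, ?_, ?_, ?_⟩
      · intro k hlk
        exact hliveA k (pvLive_mono hlk)
      · intro k hk
        rw [hgne k (hknc k hk)]
        exact hcnA k hk
      · intro k hk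
        rw [hgne k (hknk k hk)]
        exact hcnB k hk
      · intro k hk
        obtain ⟨t, ht⟩ := hheapValid k hk
        refine ⟨t, ?_⟩
        rw [hgne k (hknc k hk)]
        exact ht
      · intro k
        exact hptrmono k _ (hptrA k)
      · intro k
        by_cases hkk : k = key
        · subst hkk
          rw [PySem.Dict.getD_insert, if_pos rfl]
          exact hptrB'
        · rw [PySem.Dict.getD_insert, if_neg hkk]
          exact hptrmono k _ (hptrB k)

-- ---------- initial state, the run, and the verdict ----------

theorem pvInv_init (requests : List Int) :
    PvInvS requests 0 ⟨[], ⟨[]⟩, [], 0, 0⟩ ⟨⟨[]⟩, ⟨[]⟩, ⟨[]⟩, 0⟩ := by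
  refine ⟨List.nodup_nil, List.nodup_nil, rfl, ?_, ?_, ?_, ?_, ?_, ?_, ?_, ?_, ?_, ?_, ?_⟩
  · intro k; simp [PySem.Dict.contains]
  · intro k hk; simp at hk
  · intro k hk; simp at hk
  · intro k hk; simp at hk
  · intro k
    have : pvLastOcc? requests 0 k = none := by
      unfold pvLastOcc?
      rw [List.filter_eq_nil_iff.mpr, List.getLast?_nil]
      intro o ho
      have := pvOcc_mem.mp ho
      simp
      omega
    rw [this]
    rfl
  · intro e he; simp at he
  · intro k hk; simp at hk
  · simp
  · intro e he; simp at he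
  · intro k
    exact ⟨by simp [PySem.Dict.getD, PySem.Dict.get?], by simp [PySem.Dict.getD, PySem.Dict.get?], by
      intro j hj
      simp [PySem.Dict.getD, PySem.Dict.get?] at hj
      omega⟩
  · intro k
    exact ⟨by simp [PySem.Dict.getD, PySem.Dict.get?], by simp [PySem.Dict.getD, PySem.Dict.get?], by
      intro j hj
      simp [PySem.Dict.getD, PySem.Dict.get?] at hj
      omega⟩

theorem pvRun_inv (cs : Int) (requests : List Int) :
    ∀ m : Nat, m ≤ requests.length →
      (PvInvS requests m
        ((PySem.List.pyRange 0 (m : Int)).foldl (pvStepA (pvPositions requests) cs requests) ⟨[], ⟨[]⟩, [], 0, 0⟩)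
        ((PySem.List.pyRange 0 (m : Int)).foldl (pvStepB (pvPositions requests) cs requests) ⟨⟨[]⟩, ⟨[]⟩, ⟨[]⟩, 0⟩))
      ∨ (pvSENT ≤ (m : Int) ∧ PvInvW requests m
        ((PySem.List.pyRange 0 (m : Int)).foldl (pvStepA (pvPositions requests) cs requests) ⟨[], ⟨[]⟩, [], 0, 0⟩)
        ((PySem.List.pyRange 0 (m : Int)).foldl (pvStepB (pvPositions requests) cs requests) ⟨⟨[]⟩, ⟨[]⟩, ⟨[]⟩, 0⟩)) := by
  intro m
  induction m with
  | zero =>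
    intro _
    left
    rw [show ((0 : Nat) : Int) = 0 by rfl, PySem.List.pyRange_one_eq_nil (by omega)]
    exact pvInv_init requests
  | succ m ih =>
    intro hm
    have hcast : ((m + 1 : Nat) : Int) = (m : Int) + 1 := by push_cast; ring
    rw [hcast, PySem.List.pyRange_one_succ_right (by positivity), List.foldl_append,
      List.foldl_append]
    simp only [List.foldl_cons, List.foldl_nil]
    have hi : (0 : Int) ≤ (m : Int) := by positivity
    have hin : (m : Int) < (requests.length : Int) := by exact_mod_cast hm
    rcases ih (by omega) with hS | ⟨hge, hW⟩
    · by_cases hlt : (m : Int) < pvSENT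
      · exact Or.inl (pvStep_invS hlt hi hin hS)
      · exact Or.inr ⟨by omega, pvStep_invW (by omega) hi hin (pvStrongToWeak hS)⟩
    · exact Or.inr ⟨by omega, pvStep_invW hge hi hin hW⟩

-- ===== VERDICT (by name: the statement is the Claim_ definition above) =====
theorem simulate_optimal_hits_spec : Claim_equal_simulate_optimal_hits := by
  intro cs requests _hdom
  unfold Spec_simulate_optimal_hits
  unfold simulate_optimal_hits simulate_optimal_hits_alt
  by_cases hcs : cs = 0
  · simp [hcs]
  · simp only [if_neg hcs]
    by_cases hn0 : requests.length = 0
    · simp [hn0]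
    · simp only [if_neg hn0]
      rcases pvRun_inv cs requests requests.length Nat.le.refl with hS | ⟨_, hW⟩
      · exact hS.hits
      · exact hW.hits
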